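-- pv_equiv track=rewrite | github.com/Divyesh-Thirukonda/neetcode-submissions-so0a309w | Data Structures & Algorithms/candy-crush/submission-0.py | candyCrush
-- ===== SOURCE A (Python) =====
-- from typing import List
--
-- def candyCrush(board: List[List[int]]) -> List[List[int]]:
--     # do BFS to find all candies on left (if left, keep going left... same for right)
--     # if len of returned bfs >= 3, set all in queue to 0
--
--     # handle gravity
--     # bubble the 0 upwards for each col
--
--     # end when bfs returns len 0
--
--     width = len(board[0])
--     height = len(board)
--     def find():
--         seen = set()
--
--         for i in range(1, height-1):
--             for j in range(width):
--                 if board[i][j] == 0: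
--                     continue
--                 if board[i+1][j] == board[i-1][j] == board[i][j]:
--                     seen.add((i+1, j))
--                     seen.add((i-1, j))
--                     seen.add((i, j))
--
--         for i in range(height):
--             for j in range(1, width-1):
--                 if board[i][j] == 0:
--                     continue
--                 if board[i][j+1] == board[i][j-1] == board[i][j]:
--                     seen.add((i, j+1))
--                     seen.add((i, j-1))
--                     seen.add((i, j))
--         return seen
--
--     def crush(seen):
--         for i, j in seen:
--             board[i][j] = 0
--
--     def drop():
--         for col in range(width):
--             lowest0 = -1
--
--             for row in range(height - 1, -1, -1):
--                 if board[row][col] == 0: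
--                     lowest0 = max(lowest0, row)
--                 elif lowest0 >= 0:
--                     board[row][col], board[lowest0][col] = board[lowest0][col], board[row][col]
--                     lowest0 -= 1
--
--
--     seen = find()
--     while seen:
--         crush(seen)
--         drop()
--         seen = find()
--     return board
-- ===== SOURCE B (Python) =====
-- from typing import List
--
-- # B: run-length scanning for matches and per-column compaction instead of
-- # center-triple checks and two-pointer swaps; mutates `board` in place like A.
-- def candyCrush(board: List[List[int]]) -> List[List[int]]:
--     height = len(board)
--     width = len(board[0])
--
--     def marked_in(line):
--         # indices belonging to a run of >= 3 equal nonzero values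
--         out = []
--         start = 0
--         runval = None
--         for j, v in enumerate(line):
--             if runval is None:
--                 runval, start = v, j
--             elif v != runval:
--                 if runval != 0 and j - start >= 3:
--                     out.extend(range(start, j))
--                 runval, start = v, j
--         if runval is not None and runval != 0 and len(line) - start >= 3:
--             out.extend(range(start, len(line)))
--         return out
--
--     def find():
--         marks = set()
--         for i in range(height):
--             for j in marked_in(board[i][:width]):
--                 marks.add((i, j))
--         for j in range(width):
--             for i in marked_in([board[i][j] for i in range(height)]):
--                 marks.add((i, j))
--         return marks
--
--     marks = find()
--     while marks:
--         for j in range(width):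
--             col = [0 if (i, j) in marks else board[i][j] for i in range(height)]
--             stay = [v for v in col if v != 0]
--             newcol = [0] * (height - len(stay)) + stay
--             for i in range(height):
--                 board[i][j] = newcol[i]
--         marks = find()
--     return board
-- ===== Notes on version B (the rewrite author's own statement) =====
-- stated objective: alternative
-- what changed: Match detection is rewritten as run-length scanning of each row/column (marking whole runs of length >= 3) instead of A's centre-triple neighbour checks, and gravity as per-column compaction (collect nonzero entries, prepend zeros) instead of A's two-pointer in-place swaps; crush and gravity are fused into one column rebuild.
-- outside the precondition, e.g. on candyCrush([[5], []]): A returns [[5], []], B raises IndexError; on candyCrush([[1, 2], [3]]): A returns [[1, 2], [3]], B raises IndexError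
import Mathlib
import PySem

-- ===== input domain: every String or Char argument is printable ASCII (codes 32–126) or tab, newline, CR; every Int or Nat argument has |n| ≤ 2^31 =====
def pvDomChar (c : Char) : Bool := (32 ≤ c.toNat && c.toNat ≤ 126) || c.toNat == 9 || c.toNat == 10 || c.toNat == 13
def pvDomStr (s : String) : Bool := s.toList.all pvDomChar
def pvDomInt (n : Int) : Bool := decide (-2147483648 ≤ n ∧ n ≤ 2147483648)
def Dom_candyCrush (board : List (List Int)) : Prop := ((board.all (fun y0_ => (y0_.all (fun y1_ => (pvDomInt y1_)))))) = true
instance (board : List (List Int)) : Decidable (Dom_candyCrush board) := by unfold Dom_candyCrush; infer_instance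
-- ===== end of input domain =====

-- B replaces A's centre-triple match detection by run-length scanning and A's
-- two-pointer in-place swaps by per-column compaction (same stable board; both
-- Pythons mutate `board` in place and return it — equivalence is about the return value).

-- shared 2D indexing primitives (board[i][j] read / write)
def pvGet2 (b : List (List Int)) (i j : Int) : Int :=
  PySem.List.pyGetD (PySem.List.pyGetD b i []) j 0

def pvUpd2 (b : List (List Int)) (i j : Int) (v : Int) : List (List Int) :=
  PySem.List.pySetD b i (PySem.List.pySetD (PySem.List.pyGetD b i []) j v)

-- fuel for the outer `while` of both versions: each crush removes ≥ 1 nonzero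
-- cell, so (number of nonzero cells)+1 iterations always suffice (totality guard only)
def pvFuel (b : List (List Int)) : Nat :=
  (b.map (fun r => (r.filter (fun v => v ≠ 0)).length)).sum + 1

-- ===== PORT A =====
def pvFindA (b : List (List Int)) (h w : Int) : PySem.Set (Int × Int) :=
  let s :=
    (PySem.List.pyRange 1 (h - 1) 1).foldl (fun s i =>
      (PySem.List.pyRange 0 w 1).foldl (fun s j =>
        if pvGet2 b i j = 0 then s
        else if pvGet2 b (i + 1) j = pvGet2 b (i - 1) j ∧ pvGet2 b (i - 1) j = pvGet2 b i j then
          ((PySem.Set.add (PySem.Set.add s (i + 1, j)) (i - 1, j)).add (i, j))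
        else s) s) PySem.Set.empty
  (PySem.List.pyRange 0 h 1).foldl (fun s i =>
    (PySem.List.pyRange 1 (w - 1) 1).foldl (fun s j =>
      if pvGet2 b i j = 0 then s
      else if pvGet2 b i (j + 1) = pvGet2 b i (j - 1) ∧ pvGet2 b i (j - 1) = pvGet2 b i j then
        ((PySem.Set.add (PySem.Set.add s (i, j + 1)) (i, j - 1)).add (i, j))
      else s) s) s

def pvCrushA (seen : PySem.Set (Int × Int)) (b : List (List Int)) : List (List Int) :=
  seen.foldl (fun b p => pvUpd2 b p.1 p.2 0) b

def pvDropA (b : List (List Int)) (h w : Int) : List (List Int) :=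
  (PySem.List.pyRange 0 w 1).foldl (fun b col =>
    ((PySem.List.pyRange (h - 1) (-1) (-1)).foldl (fun (st : List (List Int) × Int) row =>
        if pvGet2 st.1 row col = 0 then (st.1, max st.2 row)
        else if 0 ≤ st.2 then
          (pvUpd2 (pvUpd2 st.1 row col (pvGet2 st.1 st.2 col)) st.2 col (pvGet2 st.1 row col),
            st.2 - 1)
        else st) (b, -1)).1) b

def pvLoopA (fuel : Nat) (b : List (List Int)) (h w : Int) : List (List Int) :=
  match fuel with
  | 0 => b
  | fuel + 1 =>
    let seen := pvFindA b h w
    if seen = [] then b else pvLoopA fuel (pvDropA (pvCrushA seen b) h w) h w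

def candyCrush (board : List (List Int)) : List (List Int) :=
  let w : Int := (PySem.List.pyGetD board 0 []).length
  let h : Int := board.length
  pvLoopA (pvFuel board) board h w

-- ===== PORT B =====
-- one step of B's run-length scanner: state (marked, start, current run value)
def pvMStep (st : List Int × Int × Option Int) (jv : Int × Int) : List Int × Int × Option Int :=
  match st.2.2 with
  | none => (st.1, jv.1, some jv.2)
  | some rv =>
    if jv.2 ≠ rv then
      (if rv ≠ 0 ∧ jv.1 - st.2.1 ≥ 3 then st.1 ++ PySem.List.pyRange st.2.1 jv.1 1 else st.1,
        jv.1, some jv.2)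
    else st

-- final flush of the last run (L = len(line))
def pvFlush (st : List Int × Int × Option Int) (L : Int) : List Int :=
  match st.2.2 with
  | none => st.1
  | some rv =>
    if rv ≠ 0 ∧ L - st.2.1 ≥ 3 then st.1 ++ PySem.List.pyRange st.2.1 L 1 else st.1

-- indices belonging to a run of ≥ 3 equal nonzero values
def pvMarkedIn (line : List Int) : List Int :=
  pvFlush ((PySem.List.enumerate line 0).foldl pvMStep ([], 0, none)) (line.length : Int)

def pvFindB (b : List (List Int)) (h w : Int) : PySem.Set (Int × Int) :=
  let s :=
    (PySem.List.pyRange 0 h 1).foldl (fun s i =>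
      (pvMarkedIn (PySem.List.slice (PySem.List.pyGetD b i []) none (some w))).foldl
        (fun s j => PySem.Set.add s (i, j)) s) PySem.Set.empty
  (PySem.List.pyRange 0 w 1).foldl (fun s j =>
    (pvMarkedIn ((PySem.List.pyRange 0 h 1).map (fun i => pvGet2 b i j))).foldl
      (fun s i => PySem.Set.add s (i, j)) s) s

-- one `while` iteration of B: zero the marked cells of each column and compact it
def pvDropB (marks : PySem.Set (Int × Int)) (b : List (List Int)) (h w : Int) :
    List (List Int) :=
  (PySem.List.pyRange 0 w 1).foldl (fun b j =>
    let col := (PySem.List.pyRange 0 h 1).map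
      (fun i => if marks.contains (i, j) then 0 else pvGet2 b i j)
    let stay := col.filter (fun v => v ≠ 0)
    let newcol := List.replicate ((h - (stay.length : Int)).toNat) 0 ++ stay
    (PySem.List.pyRange 0 h 1).foldl
      (fun b i => pvUpd2 b i j (PySem.List.pyGetD newcol i 0)) b) b

def pvLoopB (fuel : Nat) (b : List (List Int)) (h w : Int) : List (List Int) :=
  match fuel with
  | 0 => b
  | fuel + 1 =>
    let marks := pvFindB b h w
    if marks = [] then b else pvLoopB fuel (pvDropB marks b h w) h w

def candyCrush_alt (board : List (List Int)) : List (List Int) :=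
  let h : Int := board.length
  let w : Int := (PySem.List.pyGetD board 0 []).length
  pvLoopB (pvFuel board) board h w

-- ===== PRECONDITION & SPEC =====
-- Pre_ excludes the empty board (A raises IndexError on `board[0]`) and boards with a
-- row shorter than the first row: on most of those A raises IndexError too, but on a
-- few degenerate ones (≤ 2 rows and width ≤ 2, or an untouched overhang) A returns the
-- ragged board unchanged/partially processed while B, which reads every column of
-- every row, raises IndexError.
def Pre_candyCrush (board : List (List Int)) : Prop :=
  board ≠ [] ∧ ∀ r ∈ board, (board.headD []).length ≤ r.length

instance (board : List (List Int)) : Decidable (Pre_candyCrush board) := by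
  unfold Pre_candyCrush; infer_instance

def pvWitness_candyCrush : List (List Int) := [[1, 1, 1], [0, 2, 3], [2, 2, 3]]

def Spec_candyCrush (board : List (List Int)) (out : List (List Int)) : Prop := out = candyCrush_alt board
instance (board : List (List Int)) (out : List (List Int)) : Decidable (Spec_candyCrush board out) := by unfold Spec_candyCrush; infer_instance

-- ===== CLAIM (what is proved, stated in full; the proofs are below) =====
def Claim_equal_candyCrush : Prop := ∀ (board : List (List Int)), Dom_candyCrush board → Pre_candyCrush board → Spec_candyCrush board (candyCrush board)

-- ===== LEMMAS AND PROOFS =====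

-- entry b i j = board[i][j] (0 outside), Nat indices, proof layer
def ent (b : List (List Int)) (i j : Nat) : Int := (b.getD i []).getD j 0

-- column j of the board, as a list of length b.length
def colN (b : List (List Int)) (j : Nat) : List Int := b.map (fun r => r.getD j 0)

-- index k of line ℓ lies within some triple of equal nonzero values
def lineWin (ℓ : List Int) (k : Nat) : Prop :=
  ∃ c : Nat, 1 ≤ c ∧ c + 1 < ℓ.length ∧ ℓ.getD c 0 ≠ 0 ∧
    ℓ.getD (c + 1) 0 = ℓ.getD (c - 1) 0 ∧ ℓ.getD (c - 1) 0 = ℓ.getD c 0 ∧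
    (k + 1 = c ∨ k = c ∨ k = c + 1)

-- cell (i,j) of board b (width w) is crushed
def markP (b : List (List Int)) (w : Nat) (i j : Nat) : Prop :=
  lineWin ((b.getD i []).take w) j ∨ (j < w ∧ lineWin (colN b j) i)


def rowLens (b : List (List Int)) : List Nat := b.map List.length

theorem getD_row (b : List (List Int)) (i : Nat) : b.getD i [] = b[i]?.getD [] :=
  List.getD_eq_getElem?_getD

theorem ent_eq (b : List (List Int)) (i j : Nat) : ent b i j = ((b[i]?.getD [])[j]?).getD 0 := by
  simp [ent, List.getD_eq_getElem?_getD]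

theorem ent_oob (b : List (List Int)) (i j : Nat)
    (h : b.length ≤ i ∨ (b.getD i []).length ≤ j) : ent b i j = 0 := by
  rw [ent_eq]
  rcases h with h | h
  · rw [List.getElem?_eq_none h]; rfl
  · rw [getD_row] at h
    rw [List.getElem?_eq_none h]; rfl

theorem pvGet2_nat (b : List (List Int)) (i j : Nat) :
    pvGet2 b (i : Int) (j : Int) = ent b i j := by
  simp [pvGet2, ent, PySem.List.pyGetD_natCast]

theorem pvUpd2_nat (b : List (List Int)) (i j : Nat) (v : Int) :
    pvUpd2 b (i : Int) (j : Int) v = b.set i ((b.getD i []).set j v) := by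
  simp [pvUpd2, PySem.List.pySetD_natCast, PySem.List.pyGetD_natCast]

theorem ent_upd2 (b : List (List Int)) (i j i' j' : Nat) (v : Int) :
    ent (pvUpd2 b (i : Int) (j : Int) v) i' j' =
      if i' = i ∧ j' = j ∧ i < b.length ∧ j < (b.getD i []).length then v
      else ent b i' j' := by
  rw [pvUpd2_nat]
  by_cases hii : i' = i
  · subst hii
    by_cases hi : i' < b.length
    · have hrow : b.getD i' [] = b[i'] := by
        rw [getD_row, List.getElem?_eq_getElem hi, Option.getD_some]
      have h1 : (b.set i' ((b.getD i' []).set j v))[i']? = some ((b.getD i' []).set j v) := by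
        rw [List.getElem?_set]; simp [hi]
      by_cases hjj : j' = j
      · subst hjj
        by_cases hj : j' < (b.getD i' []).length
        · rw [ent_eq, h1, if_pos ⟨rfl, rfl, hi, hj⟩]
          simp only [Option.getD_some, List.getElem?_set]
          simp only [if_pos rfl, if_pos hj, ← getD_row, reduceIte]
          rfl
        · have hnoop : (b.getD i' []).set j' v = b.getD i' [] :=
            List.set_eq_of_length_le (Nat.le_of_not_lt hj)
          rw [if_neg (by tauto), ent_eq, h1, hnoop, Option.getD_some]
          rw [ent_eq, ← getD_row]
      · rw [if_neg (by tauto), ent_eq, h1, Option.getD_some, List.getElem?_set,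
          if_neg (fun h => hjj h.symm), ent_eq, ← getD_row]
    · have hnoop : b.set i' ((b.getD i' []).set j v) = b :=
        List.set_eq_of_length_le (Nat.le_of_not_lt hi)
      rw [if_neg (by tauto), hnoop]
  · rw [if_neg (by tauto), ent_eq, ent_eq, List.getElem?_set, if_neg (fun h => hii h.symm)]

theorem getD_set_eq (r : List Int) (j j' : Nat) (v : Int) :
    (r.set j v).getD j' 0 = if j' = j ∧ j < r.length then v else r.getD j' 0 := by
  rw [List.getD_eq_getElem?_getD, List.getElem?_set]
  by_cases hjj : j = j'
  · subst hjj
    by_cases hj : j < r.length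
    · simp [hj]
    · have hn : r[j]? = none := List.getElem?_eq_none (Nat.le_of_not_lt hj)
      simp [hj, List.getD_eq_getElem?_getD, hn]
  · have : ¬(j' = j) := fun h => hjj h.symm
    simp [hjj, this, List.getD_eq_getElem?_getD]

theorem rowLens_upd2 (b : List (List Int)) (i j : Nat) (v : Int) :
    rowLens (pvUpd2 b (i : Int) (j : Int) v) = rowLens b := by
  rw [pvUpd2_nat]
  unfold rowLens
  apply List.ext_getElem?
  intro k
  simp only [List.getElem?_map, List.getElem?_set]
  by_cases hik : i = k
  · subst hik
    by_cases hi : i < b.length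
    · simp [hi, List.length_set, getD_row, List.getElem?_eq_getElem hi]
    · simp [hi]
  · simp [hik]

theorem length_of_rowLens {b1 b2 : List (List Int)} (h : rowLens b1 = rowLens b2) :
    b1.length = b2.length := by
  have := congrArg List.length h
  simpa [rowLens] using this

theorem boards_eq (b1 b2 : List (List Int)) (hL : rowLens b1 = rowLens b2)
    (he : ∀ i j : Nat, ent b1 i j = ent b2 i j) : b1 = b2 := by
  have hlen : b1.length = b2.length := length_of_rowLens hL
  apply List.ext_getElem hlen
  intro i hi1 hi2
  have hrl : b1[i].length = b2[i].length := by
    have := congrArg (fun l => l.getD i 0) hL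
    simpa [rowLens, List.getD_eq_getElem?_getD, List.getElem?_eq_getElem, hi1, hi2] using this
  apply List.ext_getElem hrl
  intro j hj1 hj2
  have := he i j
  simpa [ent, List.getD_eq_getElem?_getD, List.getElem?_eq_getElem, hi1, hi2, hj1, hj2] using this

theorem length_colN (b : List (List Int)) (j : Nat) : (colN b j).length = b.length := by
  simp [colN]

theorem colN_getD (b : List (List Int)) (j i : Nat) :
    (colN b j).getD i 0 = ent b i j := by
  simp only [colN, ent, List.getD_eq_getElem?_getD, List.getElem?_map]
  cases h : b[i]? <;> simp [List.getD_eq_getElem?_getD]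

-- replace column j of b by c (c.length = b.length in all uses)
def setColJ (b : List (List Int)) (j : Nat) (c : List Int) : List (List Int) :=
  List.zipWith (fun r v => r.set j v) b c

theorem length_setColJ (b : List (List Int)) (j : Nat) (c : List Int)
    (hc : c.length = b.length) : (setColJ b j c).length = b.length := by
  simp [setColJ, hc]

theorem rowLens_setColJ (b : List (List Int)) (j : Nat) (c : List Int)
    (hc : c.length = b.length) : rowLens (setColJ b j c) = rowLens b := by
  induction b generalizing c with
  | nil => simp [setColJ, rowLens]
  | cons r b ih =>
    cases c with
    | nil => simp at hc
    | cons v c =>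
      simp only [setColJ, List.zipWith_cons_cons, rowLens, List.map_cons, List.length_set]
      have := ih c (by simpa using hc)
      simpa [setColJ, rowLens] using this

theorem ent_setColJ (b : List (List Int)) (j : Nat) (c : List Int)
    (hc : c.length = b.length) (i j' : Nat) :
    ent (setColJ b j c) i j' =
      if j' = j ∧ i < b.length ∧ j < (b.getD i []).length then c.getD i 0
      else ent b i j' := by
  induction b generalizing c i with
  | nil => cases c <;> simp [setColJ, ent]
  | cons r b ih =>
    cases c with
    | nil => simp at hc
    | cons v c =>
      cases i with
      | zero =>
        simp only [setColJ, List.zipWith_cons_cons, ent, List.getD_cons_zero,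
          List.length_cons, List.getD_cons_zero]
        rw [getD_set_eq]
        by_cases hjj : j' = j <;> by_cases hj : j < r.length <;>
          simp [hjj, hj, Nat.succ_pos]
      | succ i =>
        have := ih c (by simpa using hc) i
        simpa [setColJ, ent, Nat.succ_lt_succ_iff] using this

theorem colN_setColJ_ne (b : List (List Int)) (j : Nat) (c : List Int) (j' : Nat)
    (hne : j' ≠ j) : colN (setColJ b j c) j' = colN (List.take c.length b) j' := by
  induction b generalizing c with
  | nil => simp [setColJ, colN]
  | cons r b ih =>
    cases c with
    | nil => simp [setColJ, colN]
    | cons v c =>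
      simp only [setColJ, List.zipWith_cons_cons, colN, List.map_cons, List.length_cons,
        List.take_succ_cons]
      have h1 : (r.set j v).getD j' 0 = r.getD j' 0 := by rw [getD_set_eq]; simp [hne]
      rw [h1]
      exact congrArg (r.getD j' 0 :: ·) (by simpa [setColJ, colN] using ih c)

-- membership through a fold that only adds elements
theorem mem_foldl_iff {ι α : Type} (Q : ι → α → Prop) :
    ∀ (L : List ι) (f : List α → ι → List α),
      (∀ s x p, x ∈ L → (p ∈ f s x ↔ p ∈ s ∨ Q x p)) →
      ∀ (s : List α) (p : α), (p ∈ L.foldl f s ↔ p ∈ s ∨ ∃ x ∈ L, Q x p) := by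
  intro L
  induction L with
  | nil => simp
  | cons a L ih =>
    intro f hf s p
    rw [List.foldl_cons, ih f (fun s x p hx => hf s x p (by simp [hx])),
      hf s a p (by simp)]
    constructor
    · rintro ((h | h) | ⟨x, hx, hq⟩)
      · exact Or.inl h
      · exact Or.inr ⟨a, by simp, h⟩
      · exact Or.inr ⟨x, by simp [hx], hq⟩
    · rintro (h | ⟨x, hx, hq⟩)
      · exact Or.inl (Or.inl h)
      · rcases List.mem_cons.mp hx with rfl | hx
        · exact Or.inl (Or.inr hq)
        · exact Or.inr ⟨x, hx, hq⟩

theorem crush_rowLens : ∀ (s : List (Int × Int)) (b : List (List Int)),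
    (∀ q ∈ s, ∃ i j : Nat, q = ((i : Int), (j : Int))) →
    rowLens (pvCrushA s b) = rowLens b := by
  intro s
  induction s with
  | nil => intro b _; rfl
  | cons q s ih =>
    intro b hval
    obtain ⟨i, j, rfl⟩ := hval q (by simp)
    have h1 := ih (pvUpd2 b (i : Int) (j : Int) 0) (fun q hq => hval q (by simp [hq]))
    calc rowLens (pvCrushA (((i : Int), (j : Int)) :: s) b)
        = rowLens (pvCrushA s (pvUpd2 b (i : Int) (j : Int) 0)) := rfl
      _ = rowLens (pvUpd2 b (i : Int) (j : Int) 0) := h1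
      _ = rowLens b := rowLens_upd2 b i j 0

theorem crush_ent : ∀ (s : List (Int × Int)) (b : List (List Int)),
    (∀ q ∈ s, ∃ i j : Nat, q = ((i : Int), (j : Int))) →
    ∀ i' j' : Nat, ent (pvCrushA s b) i' j' =
      if ((i' : Int), (j' : Int)) ∈ s then 0 else ent b i' j' := by
  intro s
  induction s with
  | nil => intro b _ i' j'; simp [pvCrushA]
  | cons q s ih =>
    intro b hval i' j'
    obtain ⟨i, j, rfl⟩ := hval q (by simp)
    have hstep : pvCrushA (((i : Int), (j : Int)) :: s) b
        = pvCrushA s (pvUpd2 b (i : Int) (j : Int) 0) := rfl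
    rw [hstep, ih (pvUpd2 b (i : Int) (j : Int) 0) (fun q hq => hval q (by simp [hq])) i' j',
      ent_upd2]
    by_cases hmem : ((i' : Int), (j' : Int)) ∈ s
    · simp [hmem]
    · rw [if_neg hmem]
      by_cases heq : i' = i ∧ j' = j
      · obtain ⟨rfl, rfl⟩ := heq
        conv_rhs => rw [if_pos (by simp : ((i' : Int), (j' : Int)) ∈ ((i' : Int), (j' : Int)) :: s)]
        by_cases hir : i' < b.length ∧ j' < (b.getD i' []).length
        · rw [if_pos ⟨rfl, rfl, hir.1, hir.2⟩]
        · rw [if_neg (by tauto)]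
          exact ent_oob b i' j' (by omega)
      · rw [if_neg (by rintro ⟨rfl, rfl, -⟩; exact heq ⟨rfl, rfl⟩),
          if_neg (by
            rw [List.mem_cons]
            rintro (h | h)
            · rw [Prod.mk.injEq] at h
              exact heq ⟨by exact_mod_cast h.1, by exact_mod_cast h.2⟩
            · exact hmem h)]


-- spec-side recursive form of B's run-length scanner:
-- current run = positions [s, p) of the line, all holding rv
def runsAux : List Int → Nat → Nat → Int → List Int
  | [], s, p, rv => if rv ≠ 0 ∧ 3 ≤ p - s then PySem.List.pyRange (s : Int) (p : Int) 1 else []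
  | v :: rest, s, p, rv =>
    if v ≠ rv then
      (if rv ≠ 0 ∧ 3 ≤ p - s then PySem.List.pyRange (s : Int) (p : Int) 1 else []) ++
        runsAux rest p (p + 1) v
    else runsAux rest s (p + 1) rv

theorem scan_eq : ∀ (rest : List Int) (out : List Int) (s p : Nat) (rv : Int), s < p →
    pvFlush ((PySem.List.enumerate rest (p : Int)).foldl pvMStep (out, (s : Int), some rv))
        (((p + rest.length : Nat) : Int)) = out ++ runsAux rest s p rv := by
  intro rest
  induction rest with
  | nil =>
    intro out s p rv hsp
    rw [PySem.List.enumerate_nil, List.foldl_nil]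
    simp only [List.length_nil, Nat.add_zero]
    unfold pvFlush
    simp only [runsAux]
    by_cases hc : rv ≠ 0 ∧ 3 ≤ p - s
    · rw [if_pos (by push_cast; constructor; exact hc.1; omega), if_pos hc]
    · rw [if_neg (by push_cast; intro h; exact hc ⟨h.1, by omega⟩), if_neg hc, List.append_nil]
  | cons v rest ih =>
    intro out s p rv hsp
    rw [PySem.List.enumerate_cons, List.foldl_cons]
    by_cases hv : v = rv
    · subst hv
      have hstep : pvMStep (out, (s : Int), some v) ((p : Int), v) = (out, (s : Int), some v) := by
        unfold pvMStep; simp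
      rw [hstep]
      have hlen : ((p + (v :: rest).length : Nat) : Int) = (((p + 1) + rest.length : Nat) : Int) := by
        push_cast; simp; omega
      have hcast : ((p : Int) + 1) = (((p + 1 : Nat)) : Int) := by push_cast; ring
      rw [hlen, hcast, ih out s (p + 1) v (by omega)]
      simp [runsAux]
    · have hstep : pvMStep (out, (s : Int), some rv) ((p : Int), v) =
          (if rv ≠ 0 ∧ (p : Int) - (s : Int) ≥ 3 then
              out ++ PySem.List.pyRange (s : Int) (p : Int) 1 else out, (p : Int), some v) := by
        unfold pvMStep; simp [hv]
      rw [hstep]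
      have hlen : ((p + (v :: rest).length : Nat) : Int) = (((p + 1) + rest.length : Nat) : Int) := by
        push_cast; simp; omega
      have hcast : ((p : Int) + 1) = (((p + 1 : Nat)) : Int) := by push_cast; ring
      rw [hlen, hcast, ih _ p (p + 1) v (by omega)]
      show _ = out ++ runsAux (v :: rest) s p rv
      simp only [runsAux]
      rw [if_pos hv]
      by_cases hc : rv ≠ 0 ∧ 3 ≤ p - s
      · rw [if_pos (by constructor; exact hc.1; push_cast; omega), if_pos hc, List.append_assoc]
      · rw [if_neg (by intro h; exact hc ⟨h.1, by omega⟩), if_neg hc, List.nil_append]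

theorem lineWin_lt (ℓ : List Int) (k : Nat) (h : lineWin ℓ k) : k < ℓ.length := by
  obtain ⟨c, h1, h2, _, _, _, hk⟩ := h
  omega

theorem run_windows (ℓ : List Int) (s p : Nat) (rv : Int)
    (hsp : s < p) (hp : p ≤ ℓ.length)
    (hrun : ∀ t, s ≤ t → t < p → ℓ.getD t 0 = rv)
    (hleft : s = 0 ∨ ℓ.getD (s - 1) 0 ≠ rv)
    (hright : p = ℓ.length ∨ ℓ.getD p 0 ≠ rv) :
    ∀ k : Nat, s ≤ k → k < p → (lineWin ℓ k ↔ (rv ≠ 0 ∧ s + 3 ≤ p)) := by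
  intro k hsk hkp
  constructor
  · rintro ⟨c, hc1, hc2, hc0, he1, he2, hk⟩
    -- the witness position k lies in the run, so the window's common value is rv
    have hkv : ℓ.getD k 0 = rv := hrun k hsk hkp
    have hV : ℓ.getD c 0 = rv := by
      rcases hk with hk | hk | hk
      · rw [← he2]; rw [← hkv]; congr 1; omega
      · rw [← hkv]; congr 1; omega
      · rw [← he2, ← he1]; rw [← hkv]; congr 1; omega
    have hVm : ℓ.getD (c - 1) 0 = rv := by rw [he2, hV]
    have hVp : ℓ.getD (c + 1) 0 = rv := by rw [he1, hVm]
    -- the whole window lies inside the run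
    have hcl : s ≤ c - 1 := by
      by_contra hcon
      have hs1 : 1 ≤ s := by omega
      rcases hleft with h | h
      · omega
      · -- s-1 ∈ {c-1, c}
        have : s - 1 = c - 1 ∨ s - 1 = c := by omega
        rcases this with h' | h'
        · exact h (by rw [h']; exact hVm)
        · exact h (by rw [h']; exact hV)
    have hcr : c + 1 < p := by
      by_contra hcon
      have hpc : p = c ∨ p = c + 1 := by omega
      rcases hright with h | h
      · omega
      · rcases hpc with h' | h'
        · exact h (by rw [h']; exact hV)
        · exact h (by rw [h']; exact hVp)
    exact ⟨hc0 ∘ (by intro h; rw [← hV] at h; exact h), by omega⟩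
  · rintro ⟨h0, h3⟩
    set c : Nat := if k = s then s + 1 else if k = p - 1 then p - 2 else k with hc
    have hcs : s + 1 ≤ c ∧ c + 1 ≤ p - 1 ∧ (k + 1 = c ∨ k = c ∨ k = c + 1) := by
      rw [hc]; split_ifs <;> omega
    refine ⟨c, by omega, by omega, ?_, ?_, ?_, hcs.2.2⟩
    · rw [hrun c (by omega) (by omega)]; exact h0
    · rw [hrun (c + 1) (by omega) (by omega), hrun (c - 1) (by omega) (by omega)]
    · rw [hrun (c - 1) (by omega) (by omega), hrun c (by omega) (by omega)]

theorem runsAux_mem : ∀ (rest : List Int) (s p : Nat) (rv : Int) (ℓ : List Int),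
    ℓ.length = p + rest.length → s < p →
    (∀ t, s ≤ t → t < p → ℓ.getD t 0 = rv) →
    (s = 0 ∨ ℓ.getD (s - 1) 0 ≠ rv) →
    (∀ t, t < rest.length → rest.getD t 0 = ℓ.getD (p + t) 0) →
    ∀ k : Int, (k ∈ runsAux rest s p rv ↔ ∃ kn : Nat, k = (kn : Int) ∧ s ≤ kn ∧ lineWin ℓ kn) := by
  intro rest
  induction rest with
  | nil =>
    intro s p rv ℓ hL hsp hrun hleft _ k
    have hLp : ℓ.length = p := by simpa using hL
    simp only [runsAux]
    by_cases hc : rv ≠ 0 ∧ 3 ≤ p - s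
    · rw [if_pos hc, PySem.List.mem_pyRange_one]
      constructor
      · rintro ⟨h1, h2⟩
        refine ⟨k.toNat, by omega, by omega, ?_⟩
        rw [(run_windows ℓ s p rv hsp (by omega) hrun hleft (Or.inl hLp.symm) k.toNat
          (by omega) (by omega))]
        exact ⟨hc.1, by omega⟩
      · rintro ⟨kn, rfl, hs, hw⟩
        have hk : kn < p := by have := lineWin_lt ℓ kn hw; omega
        constructor <;> [exact_mod_cast hs; exact_mod_cast hk]
    · rw [if_neg hc]
      simp only [List.not_mem_nil, false_iff]
      rintro ⟨kn, rfl, hs, hw⟩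
      have hk : kn < p := by have := lineWin_lt ℓ kn hw; omega
      exact hc ((run_windows ℓ s p rv hsp (by omega) hrun hleft (Or.inl hLp.symm) kn hs hk).mp hw
        |> fun h => ⟨h.1, by omega⟩)
  | cons v rest ih =>
    intro s p rv ℓ hL hsp hrun hleft hrest k
    have hLp : p < ℓ.length := by simp at hL; omega
    have hpv : ℓ.getD p 0 = v := by
      have := hrest 0 (by simp)
      simpa using this.symm
    simp only [runsAux]
    by_cases hv : v = rv
    · rw [if_neg (by simp [hv])]
      rw [ih s (p + 1) rv ℓ (by rw [List.length_cons] at hL; omega) (by omega)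
        (fun t ht1 ht2 => by
          rcases Nat.lt_or_ge t p with h | h
          · exact hrun t ht1 h
          · have ht : t = p := by omega
            rw [ht, hpv]; exact hv)
        hleft
        (fun t ht => by
          have := hrest (t + 1) (by simp; omega)
          simpa [Nat.add_assoc, Nat.add_comm 1 t] using this) k]
    · rw [if_pos hv, List.mem_append]
      have hsecond := ih p (p + 1) v ℓ (by rw [List.length_cons] at hL; omega) (by omega)
        (fun t ht1 ht2 => by have ht : t = p := (by omega); rw [ht]; exact hpv)
        (Or.inr (by
          have : p - 1 < p := by omega
          rw [hrun (p - 1) (by omega) this]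
          exact fun h => hv h.symm))
        (fun t ht => by
          have := hrest (t + 1) (by simp; omega)
          simpa [Nat.add_assoc, Nat.add_comm 1 t] using this) k
      have hfirst : k ∈ (if rv ≠ 0 ∧ 3 ≤ p - s then PySem.List.pyRange (s : Int) (p : Int) 1 else [])
          ↔ ∃ kn : Nat, k = (kn : Int) ∧ s ≤ kn ∧ kn < p ∧ lineWin ℓ kn := by
        have hrw := run_windows ℓ s p rv hsp (by omega) hrun hleft (Or.inr (by rw [hpv]; exact hv))
        by_cases hc : rv ≠ 0 ∧ 3 ≤ p - s
        · rw [if_pos hc, PySem.List.mem_pyRange_one]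
          constructor
          · rintro ⟨h1, h2⟩
            exact ⟨k.toNat, by omega, by omega, by omega,
              (hrw k.toNat (by omega) (by omega)).mpr ⟨hc.1, by omega⟩⟩
          · rintro ⟨kn, rfl, h1, h2, _⟩
            constructor <;> [exact_mod_cast h1; exact_mod_cast h2]
        · rw [if_neg hc]
          simp only [List.not_mem_nil, false_iff]
          rintro ⟨kn, rfl, h1, h2, hw⟩
          exact hc (((hrw kn h1 h2).mp hw) |> fun h => ⟨h.1, by omega⟩)
      rw [hfirst, hsecond]
      constructor
      · rintro (⟨kn, rfl, h1, h2, hw⟩ | ⟨kn, rfl, h1, hw⟩)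
        · exact ⟨kn, rfl, h1, hw⟩
        · exact ⟨kn, rfl, by omega, hw⟩
      · rintro ⟨kn, rfl, h1, hw⟩
        rcases Nat.lt_or_ge kn p with h | h
        · exact Or.inl ⟨kn, rfl, h1, h, hw⟩
        · exact Or.inr ⟨kn, rfl, h, hw⟩

theorem markedIn_cons (v : Int) (rest : List Int) :
    pvMarkedIn (v :: rest) = runsAux rest 0 1 v := by
  unfold pvMarkedIn
  rw [PySem.List.enumerate_cons, List.foldl_cons]
  have hstep : pvMStep (([], 0, none) : List Int × Int × Option Int) ((0 : Int), v)
      = ([], (0 : Int), some v) := by unfold pvMStep; simp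
  rw [hstep]
  have h := scan_eq rest [] 0 1 v (by omega)
  simpa [Nat.add_comm] using h

theorem mem_markedIn (ℓ : List Int) (k : Int) :
    k ∈ pvMarkedIn ℓ ↔ ∃ kn : Nat, k = (kn : Int) ∧ lineWin ℓ kn := by
  cases ℓ with
  | nil =>
    constructor
    · intro h; simp [pvMarkedIn, PySem.List.enumerate_nil, pvFlush] at h
    · rintro ⟨kn, rfl, hw⟩
      have := lineWin_lt [] kn hw
      simp at this
  | cons v rest =>
    rw [markedIn_cons]
    rw [runsAux_mem rest 0 1 v (v :: rest) (by simp [Nat.add_comm]) (by omega)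
      (fun t ht1 ht2 => by have h0 : t = 0 := (by omega); rw [h0, List.getD_cons_zero])
      (Or.inl rfl)
      (fun t ht => by simp [Nat.add_comm 1 t])]
    constructor
    · rintro ⟨kn, rfl, _, hw⟩; exact ⟨kn, rfl, hw⟩
    · rintro ⟨kn, rfl, hw⟩; exact ⟨kn, rfl, by omega, hw⟩


theorem mem_stepA {s : PySem.Set (Int × Int)} {q a1 a2 a3 : Int × Int} {c0 ceq : Prop}
    [Decidable c0] [Decidable ceq] :
    q ∈ (if c0 then s
         else if ceq then ((PySem.Set.add (PySem.Set.add s a1) a2).add a3) else s) ↔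
      q ∈ s ∨ (¬c0 ∧ ceq ∧ (q = a1 ∨ q = a2 ∨ q = a3)) := by
  split_ifs with h1 h2 <;> simp [PySem.Set.mem_add] <;> tauto

theorem mem_fold_addPairs (L : List Int) (f : Int → Int × Int)
    (s : PySem.Set (Int × Int)) (q : Int × Int) :
    q ∈ L.foldl (fun s k => PySem.Set.add s (f k)) s ↔ q ∈ s ∨ ∃ k ∈ L, q = f k := by
  refine mem_foldl_iff (fun k q => q = f k) L _ (fun s x p _ => ?_) s q
  simp [PySem.Set.mem_add]

theorem getD_take (l : List Int) (n t : Nat) (h : t < n) :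
    (l.take n).getD t 0 = l.getD t 0 := by
  rw [List.getD_eq_getElem?_getD, List.getD_eq_getElem?_getD, List.getElem?_take]
  simp [h]

theorem length_take_of_le {α : Type} (l : List α) (n : Nat) (h : n ≤ l.length) :
    (l.take n).length = n := by simp [h]

theorem colLine_eq (b : List (List Int)) (j : Nat) :
    (PySem.List.pyRange 0 (b.length : Int) 1).map (fun i => pvGet2 b i (j : Int)) = colN b j := by
  rw [PySem.List.pyRange_one]
  apply List.ext_getElem
  · simp [colN]
  · intro i h1 h2
    simp only [List.getElem_map, List.getElem_range, colN]
    have : (0 : Int) + (i : Int) = (i : Int) := by ring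
    rw [this, pvGet2_nat]
    simp only [List.length_map, List.length_range] at h1
    have h2' : i < b.length := by simpa [colN] using h2
    simp [ent, List.getD_eq_getElem?_getD, List.getElem?_eq_getElem h2']

-- window form of one vertical centre of A

-- the two passes of A, as existential conditions
def QvA (b : List (List Int)) (w : Nat) (iI : Int) (p : Int × Int) : Prop :=
  ∃ jI ∈ PySem.List.pyRange 0 (w : Int) 1,
    ¬(pvGet2 b iI jI = 0) ∧
    (pvGet2 b (iI + 1) jI = pvGet2 b (iI - 1) jI ∧ pvGet2 b (iI - 1) jI = pvGet2 b iI jI) ∧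
    (p = (iI + 1, jI) ∨ p = (iI - 1, jI) ∨ p = (iI, jI))

def QhA (b : List (List Int)) (w : Nat) (iI : Int) (p : Int × Int) : Prop :=
  ∃ jI ∈ PySem.List.pyRange 1 ((w : Int) - 1) 1,
    ¬(pvGet2 b iI jI = 0) ∧
    (pvGet2 b iI (jI + 1) = pvGet2 b iI (jI - 1) ∧ pvGet2 b iI (jI - 1) = pvGet2 b iI jI) ∧
    (p = (iI, jI + 1) ∨ p = (iI, jI - 1) ∨ p = (iI, jI))

theorem mem_innerV (b : List (List Int)) (w : Nat) (iI : Int)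
    (s : PySem.Set (Int × Int)) (p : Int × Int) :
    p ∈ (PySem.List.pyRange 0 (w : Int) 1).foldl (fun s j =>
        if pvGet2 b iI j = 0 then s
        else if pvGet2 b (iI + 1) j = pvGet2 b (iI - 1) j ∧
            pvGet2 b (iI - 1) j = pvGet2 b iI j then
          ((PySem.Set.add (PySem.Set.add s (iI + 1, j)) (iI - 1, j)).add (iI, j))
        else s) s ↔ p ∈ s ∨ QvA b w iI p := by
  exact mem_foldl_iff
    (fun jI p' => ¬(pvGet2 b iI jI = 0) ∧
      (pvGet2 b (iI + 1) jI = pvGet2 b (iI - 1) jI ∧ pvGet2 b (iI - 1) jI = pvGet2 b iI jI) ∧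
      (p' = (iI + 1, jI) ∨ p' = (iI - 1, jI) ∨ p' = (iI, jI)))
    _ _ (fun s' y p' _ => mem_stepA) s p

theorem mem_innerH (b : List (List Int)) (w : Nat) (iI : Int)
    (s : PySem.Set (Int × Int)) (p : Int × Int) :
    p ∈ (PySem.List.pyRange 1 ((w : Int) - 1) 1).foldl (fun s j =>
        if pvGet2 b iI j = 0 then s
        else if pvGet2 b iI (j + 1) = pvGet2 b iI (j - 1) ∧
            pvGet2 b iI (j - 1) = pvGet2 b iI j then
          ((PySem.Set.add (PySem.Set.add s (iI, j + 1)) (iI, j - 1)).add (iI, j))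
        else s) s ↔ p ∈ s ∨ QhA b w iI p := by
  exact mem_foldl_iff
    (fun jI p' => ¬(pvGet2 b iI jI = 0) ∧
      (pvGet2 b iI (jI + 1) = pvGet2 b iI (jI - 1) ∧ pvGet2 b iI (jI - 1) = pvGet2 b iI jI) ∧
      (p' = (iI, jI + 1) ∨ p' = (iI, jI - 1) ∨ p' = (iI, jI)))
    _ _ (fun s' y p' _ => mem_stepA) s p

theorem mem_findA_raw (b : List (List Int)) (w : Nat) (q : Int × Int) :
    q ∈ pvFindA b (b.length : Int) (w : Int) ↔
      (∃ iI ∈ PySem.List.pyRange 1 ((b.length : Int) - 1) 1, QvA b w iI q) ∨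
      (∃ iI ∈ PySem.List.pyRange 0 (b.length : Int) 1, QhA b w iI q) := by
  unfold pvFindA
  rw [mem_foldl_iff (QhA b w) _ _ (fun s x p _ => mem_innerH b w x s p),
    mem_foldl_iff (QvA b w) _ _ (fun s x p _ => mem_innerV b w x s p)]
  simp only [PySem.Set.empty]
  constructor
  · rintro ((h | h) | h)
    · simp at h
    · exact Or.inl h
    · exact Or.inr h
  · rintro (h | h)
    · exact Or.inl (Or.inr h)
    · exact Or.inr h

theorem QvA_iff (b : List (List Int)) (w : Nat) (q : Int × Int) :
    (∃ iI ∈ PySem.List.pyRange 1 ((b.length : Int) - 1) 1, QvA b w iI q) ↔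
      ∃ i j : Nat, q = ((i : Int), (j : Int)) ∧ j < w ∧ lineWin (colN b j) i := by
  constructor
  · rintro ⟨iI, hiI, jI, hjI, h0, ⟨he1, he2⟩, hq⟩
    rw [PySem.List.mem_pyRange_one] at hiI hjI
    obtain ⟨c, rfl⟩ : ∃ c : Nat, iI = (c : Int) := ⟨iI.toNat, by omega⟩
    obtain ⟨j, rfl⟩ : ∃ j : Nat, jI = (j : Int) := ⟨jI.toNat, by omega⟩
    have hc1 : 1 ≤ c := by omega
    have hc2 : c + 1 < b.length := by omega
    have hjw : j < w := by omega
    have e1 : ((c : Int) + 1) = ((c + 1 : Nat) : Int) := by push_cast; ring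
    have e2 : ((c : Int) - 1) = ((c - 1 : Nat) : Int) := by omega
    rw [e1] at he1 hq
    rw [e2] at he1 he2 hq
    rw [pvGet2_nat] at h0
    rw [pvGet2_nat, pvGet2_nat] at he1
    rw [pvGet2_nat, pvGet2_nat] at he2
    have hwin : lineWin (colN b j) (c - 1) ∧ lineWin (colN b j) c ∧
        lineWin (colN b j) (c + 1) := by
      refine ⟨⟨c, hc1, ?_, ?_, ?_, ?_, Or.inl (by omega)⟩,
        ⟨c, hc1, ?_, ?_, ?_, ?_, Or.inr (Or.inl rfl)⟩,
        ⟨c, hc1, ?_, ?_, ?_, ?_, Or.inr (Or.inr rfl)⟩⟩ <;>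
        simp only [length_colN, colN_getD] <;> first | omega | assumption
    rcases hq with hq | hq | hq
    · exact ⟨c + 1, j, hq, hjw, hwin.2.2⟩
    · exact ⟨c - 1, j, hq, hjw, hwin.1⟩
    · exact ⟨c, j, hq, hjw, hwin.2.1⟩
  · rintro ⟨i, j, rfl, hjw, c, hc1, hc2, hc0, he1, he2, hk⟩
    rw [length_colN] at hc2
    simp only [colN_getD] at hc0 he1 he2
    refine ⟨(c : Int), by rw [PySem.List.mem_pyRange_one]; omega,
      (j : Int), by rw [PySem.List.mem_pyRange_one]; omega, ?_, ⟨?_, ?_⟩, ?_⟩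
    · rw [pvGet2_nat]; exact hc0
    · have e1 : ((c : Int) + 1) = ((c + 1 : Nat) : Int) := by push_cast; ring
      have e2 : ((c : Int) - 1) = ((c - 1 : Nat) : Int) := by omega
      rw [e1, e2, pvGet2_nat, pvGet2_nat]; exact he1
    · have e2 : ((c : Int) - 1) = ((c - 1 : Nat) : Int) := by omega
      rw [e2, pvGet2_nat, pvGet2_nat]; exact he2
    · rcases hk with hk | hk | hk
      · exact Or.inr (Or.inl (by rw [Prod.mk.injEq]; constructor <;> [omega; rfl]))
      · exact Or.inr (Or.inr (by rw [Prod.mk.injEq]; constructor <;> [omega; rfl]))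
      · exact Or.inl (by rw [Prod.mk.injEq]; constructor <;> [omega; rfl])

theorem row_len_of_take (b : List (List Int)) (w : Nat) (hw : ∀ r ∈ b, w ≤ r.length)
    (i : Nat) (hi : i < b.length) : ((b.getD i []).take w).length = w := by
  have hr : b.getD i [] = b[i] := by
    rw [List.getD_eq_getElem?_getD, List.getElem?_eq_getElem hi, Option.getD_some]
  rw [hr]
  exact length_take_of_le _ _ (hw b[i] (List.getElem_mem hi))

theorem QhA_iff (b : List (List Int)) (w : Nat) (hw : ∀ r ∈ b, w ≤ r.length) (q : Int × Int) :
    (∃ iI ∈ PySem.List.pyRange 0 (b.length : Int) 1, QhA b w iI q) ↔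
      ∃ i j : Nat, q = ((i : Int), (j : Int)) ∧ lineWin ((b.getD i []).take w) j := by
  constructor
  · rintro ⟨iI, hiI, jI, hjI, h0, ⟨he1, he2⟩, hq⟩
    rw [PySem.List.mem_pyRange_one] at hiI hjI
    obtain ⟨i, rfl⟩ : ∃ i : Nat, iI = (i : Int) := ⟨iI.toNat, by omega⟩
    obtain ⟨c, rfl⟩ : ∃ c : Nat, jI = (c : Int) := ⟨jI.toNat, by omega⟩
    have hi : i < b.length := by omega
    have hc1 : 1 ≤ c := by omega
    have hc2 : c + 1 < w := by omega
    have hlen : ((b.getD i []).take w).length = w := row_len_of_take b w hw i hi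
    have e1 : ((c : Int) + 1) = ((c + 1 : Nat) : Int) := by push_cast; ring
    have e2 : ((c : Int) - 1) = ((c - 1 : Nat) : Int) := by omega
    rw [e1] at he1 hq
    rw [e2] at he1 he2 hq
    rw [pvGet2_nat] at h0
    rw [pvGet2_nat, pvGet2_nat] at he1
    rw [pvGet2_nat, pvGet2_nat] at he2
    have hg : ∀ t : Nat, t < w → ((b.getD i []).take w).getD t 0 = ent b i t := by
      intro t ht; rw [getD_take _ _ _ ht]; rfl
    have hwin : lineWin ((b.getD i []).take w) (c - 1) ∧ lineWin ((b.getD i []).take w) c ∧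
        lineWin ((b.getD i []).take w) (c + 1) := by
      refine ⟨⟨c, hc1, ?_, ?_, ?_, ?_, Or.inl (by omega)⟩,
        ⟨c, hc1, ?_, ?_, ?_, ?_, Or.inr (Or.inl rfl)⟩,
        ⟨c, hc1, ?_, ?_, ?_, ?_, Or.inr (Or.inr rfl)⟩⟩ <;>
        first
          | (rw [hlen]; omega)
          | (rw [hg _ (by omega)]; assumption)
          | (rw [hg _ (by omega), hg _ (by omega)]; assumption)
    rcases hq with hq | hq | hq
    · exact ⟨i, c + 1, hq, hwin.2.2⟩
    · exact ⟨i, c - 1, hq, hwin.1⟩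
    · exact ⟨i, c, hq, hwin.2.1⟩
  · rintro ⟨i, j, rfl, c, hc1, hc2, hc0, he1, he2, hk⟩
    have hi : i < b.length := by
      by_contra hcon
      have hrow : b.getD i [] = [] := by
        rw [List.getD_eq_getElem?_getD, List.getElem?_eq_none (by omega)]; rfl
      rw [hrow] at hc2; simp at hc2
    have hlen : ((b.getD i []).take w).length = w := row_len_of_take b w hw i hi
    rw [hlen] at hc2
    have hg : ∀ t : Nat, t < w → ((b.getD i []).take w).getD t 0 = ent b i t := by
      intro t ht; rw [getD_take _ _ _ ht]; rfl
    rw [hg _ (by omega)] at hc0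
    rw [hg _ (by omega), hg _ (by omega)] at he1
    rw [hg _ (by omega), hg _ (by omega)] at he2
    refine ⟨(i : Int), by rw [PySem.List.mem_pyRange_one]; omega,
      (c : Int), by rw [PySem.List.mem_pyRange_one]; omega, ?_, ⟨?_, ?_⟩, ?_⟩
    · rw [pvGet2_nat]; exact hc0
    · have e1 : ((c : Int) + 1) = ((c + 1 : Nat) : Int) := by push_cast; ring
      have e2 : ((c : Int) - 1) = ((c - 1 : Nat) : Int) := by omega
      rw [e1, e2, pvGet2_nat, pvGet2_nat]; exact he1
    · have e2 : ((c : Int) - 1) = ((c - 1 : Nat) : Int) := by omega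
      rw [e2, pvGet2_nat, pvGet2_nat]; exact he2
    · rcases hk with hk | hk | hk
      · exact Or.inr (Or.inl (by rw [Prod.mk.injEq]; constructor <;> [rfl; omega]))
      · exact Or.inr (Or.inr (by rw [Prod.mk.injEq]; constructor <;> [rfl; omega]))
      · exact Or.inl (by rw [Prod.mk.injEq]; constructor <;> [rfl; omega])

theorem mem_findA (b : List (List Int)) (w : Nat)
    (hw : ∀ r ∈ b, w ≤ r.length) (q : Int × Int) :
    q ∈ pvFindA b (b.length : Int) (w : Int) ↔
      ∃ i j : Nat, q = ((i : Int), (j : Int)) ∧ markP b w i j := by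
  rw [mem_findA_raw, QvA_iff, QhA_iff b w hw]
  unfold markP
  constructor
  · rintro (⟨i, j, rfl, h1, h2⟩ | ⟨i, j, rfl, h⟩)
    · exact ⟨i, j, rfl, Or.inr ⟨h1, h2⟩⟩
    · exact ⟨i, j, rfl, Or.inl h⟩
  · rintro ⟨i, j, rfl, h | h⟩
    · exact Or.inr ⟨i, j, rfl, h⟩
    · exact Or.inl ⟨i, j, rfl, h.1, h.2⟩

def QhB (b : List (List Int)) (w : Nat) (iI : Int) (p : Int × Int) : Prop :=
  ∃ k ∈ pvMarkedIn (PySem.List.slice (PySem.List.pyGetD b iI []) none (some (w : Int))),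
    p = (iI, k)

def QvB (b : List (List Int)) (jI : Int) (p : Int × Int) : Prop :=
  ∃ k ∈ pvMarkedIn ((PySem.List.pyRange 0 (b.length : Int) 1).map (fun i => pvGet2 b i jI)),
    p = (k, jI)

theorem mem_findB_raw (b : List (List Int)) (w : Nat) (q : Int × Int) :
    q ∈ pvFindB b (b.length : Int) (w : Int) ↔
      (∃ iI ∈ PySem.List.pyRange 0 (b.length : Int) 1, QhB b w iI q) ∨
      (∃ jI ∈ PySem.List.pyRange 0 (w : Int) 1, QvB b jI q) := by
  unfold pvFindB
  rw [mem_foldl_iff (QvB b) _ _ (fun s x p _ => by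
      exact mem_fold_addPairs _ (fun k => (k, x)) s p),
    mem_foldl_iff (QhB b w) _ _ (fun s x p _ => by
      exact mem_fold_addPairs _ (fun k => (x, k)) s p)]
  simp only [PySem.Set.empty]
  constructor
  · rintro ((h | h) | h)
    · simp at h
    · exact Or.inl h
    · exact Or.inr h
  · rintro (h | h)
    · exact Or.inl (Or.inr h)
    · exact Or.inr h

theorem QhB_iff (b : List (List Int)) (w : Nat) (hw : ∀ r ∈ b, w ≤ r.length) (q : Int × Int) :
    (∃ iI ∈ PySem.List.pyRange 0 (b.length : Int) 1, QhB b w iI q) ↔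
      ∃ i j : Nat, q = ((i : Int), (j : Int)) ∧ lineWin ((b.getD i []).take w) j := by
  constructor
  · rintro ⟨iI, hiI, k, hk, rfl⟩
    rw [PySem.List.mem_pyRange_one] at hiI
    obtain ⟨i, rfl⟩ : ∃ i : Nat, iI = (i : Int) := ⟨iI.toNat, by omega⟩
    rw [PySem.List.pyGetD_natCast, PySem.List.slice_to_natCast] at hk
    rw [mem_markedIn] at hk
    obtain ⟨j, rfl, hwin⟩ := hk
    exact ⟨i, j, rfl, hwin⟩
  · rintro ⟨i, j, rfl, hwin⟩
    have hi : i < b.length := by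
      by_contra hcon
      have hrow : b.getD i [] = [] := by
        rw [List.getD_eq_getElem?_getD, List.getElem?_eq_none (by omega)]; rfl
      have := lineWin_lt _ _ hwin
      rw [hrow] at this; simp at this
    refine ⟨(i : Int), by rw [PySem.List.mem_pyRange_one]; omega, (j : Int), ?_, rfl⟩
    rw [PySem.List.pyGetD_natCast, PySem.List.slice_to_natCast, mem_markedIn]
    exact ⟨j, rfl, hwin⟩

theorem QvB_iff (b : List (List Int)) (w : Nat) (q : Int × Int) :
    (∃ jI ∈ PySem.List.pyRange 0 (w : Int) 1, QvB b jI q) ↔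
      ∃ i j : Nat, q = ((i : Int), (j : Int)) ∧ j < w ∧ lineWin (colN b j) i := by
  constructor
  · rintro ⟨jI, hjI, k, hk, rfl⟩
    rw [PySem.List.mem_pyRange_one] at hjI
    obtain ⟨j, rfl⟩ : ∃ j : Nat, jI = (j : Int) := ⟨jI.toNat, by omega⟩
    rw [colLine_eq, mem_markedIn] at hk
    obtain ⟨i, rfl, hwin⟩ := hk
    exact ⟨i, j, rfl, by omega, hwin⟩
  · rintro ⟨i, j, rfl, hjw, hwin⟩
    refine ⟨(j : Int), by rw [PySem.List.mem_pyRange_one]; omega, (i : Int), ?_, rfl⟩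
    rw [colLine_eq, mem_markedIn]
    exact ⟨i, rfl, hwin⟩

theorem mem_findB (b : List (List Int)) (w : Nat)
    (hw : ∀ r ∈ b, w ≤ r.length) (q : Int × Int) :
    q ∈ pvFindB b (b.length : Int) (w : Int) ↔
      ∃ i j : Nat, q = ((i : Int), (j : Int)) ∧ markP b w i j := by
  rw [mem_findB_raw, QvB_iff b w, QhB_iff b w hw]
  unfold markP
  constructor
  · rintro (⟨i, j, rfl, h⟩ | ⟨i, j, rfl, h1, h2⟩)
    · exact ⟨i, j, rfl, Or.inl h⟩
    · exact ⟨i, j, rfl, Or.inr ⟨h1, h2⟩⟩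
  · rintro ⟨i, j, rfl, h | h⟩
    · exact Or.inl ⟨i, j, rfl, h⟩
    · exact Or.inr ⟨i, j, rfl, h.1, h.2⟩


-- A's two-pointer pass on a single column, abstracted from the board
def colStep (st : List Int × Int) (row : Int) : List Int × Int :=
  if PySem.List.pyGetD st.1 row 0 = 0 then (st.1, max st.2 row)
  else if 0 ≤ st.2 then
    ((PySem.List.pySetD (PySem.List.pySetD st.1 row (PySem.List.pyGetD st.1 st.2 0)) st.2
      (PySem.List.pyGetD st.1 row 0)), st.2 - 1)
  else st

theorem getD_append_idx (A R : List Int) (k : Nat) (d : Int) :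
    (A ++ R).getD (A.length + k) d = R.getD k d := by
  rw [List.getD_eq_getElem?_getD, List.getD_eq_getElem?_getD,
    List.getElem?_append_right (by omega),
    show A.length + k - A.length = k from by omega]

theorem getD_append_self (A R : List Int) (d : Int) :
    (A ++ R).getD A.length d = R.getD 0 d := by
  have := getD_append_idx A R 0 d
  simpa using this

theorem set_append_mid (A R : List Int) (x v : Int) :
    (A ++ x :: R).set A.length v = A ++ v :: R := by
  rw [List.set_append]
  simp

theorem set_replicate_last (m : Nat) (a : Int) :
    (List.replicate (m + 1) (0 : Int)).set m a = List.replicate m 0 ++ [a] := by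
  rw [List.replicate_succ', List.set_append]
  simp

theorem swap_surgery (A : List Int) (a : Int) (m : Nat) (N : List Int) :
    ((A ++ [a] ++ List.replicate m 0 ++ N).set A.length 0).set (A.length + m) a
      = A ++ List.replicate m 0 ++ (a :: N) := by
  have h1 : (A ++ [a] ++ List.replicate m 0 ++ N).set A.length 0
      = (A ++ List.replicate (m + 1) 0) ++ N := by
    rw [show A ++ [a] ++ List.replicate m 0 ++ N = A ++ (a :: (List.replicate m 0 ++ N)) from by simp,
      set_append_mid]
    simp [List.replicate_succ]
  rw [h1, List.set_append,
    if_pos (by simp only [List.length_append, List.length_replicate]; omega)]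
  rw [List.set_append, if_neg (by omega)]
  rw [show A.length + m - A.length = m from by omega, set_replicate_last]
  simp

theorem colfold_correct : ∀ (A : List Int) (m : Nat) (N : List Int) (l : Int),
    (∀ n ∈ N, n ≠ 0) →
    ((l = -1 ∧ m = 0) ∨ (1 ≤ m ∧ l = (A.length : Int) - 1 + (m : Int))) →
    ((PySem.List.pyRange ((A.length : Int) - 1) (-1) (-1)).foldl colStep
        (A ++ List.replicate m 0 ++ N, l)).1
      = List.replicate ((A.filter (fun v => v = 0)).length + m) 0 ++
          A.filter (fun v => v ≠ 0) ++ N := by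
  intro A
  induction A using List.reverseRecOn with
  | nil =>
    intro m N l hN hl
    rw [PySem.List.pyRange_neg_one_eq_nil (by simp)]
    simp
  | append_singleton A a ih =>
    intro m N l hN hl
    have hlen : (((A ++ [a]).length : Int) - 1) = (A.length : Int) := by
      simp only [List.length_append, List.length_cons, List.length_nil]
      push_cast; omega
    rw [hlen, PySem.List.pyRange_neg_one_cons
      (show (-1 : Int) < (A.length : Int) from
        lt_of_lt_of_le (by norm_num) (Int.natCast_nonneg _)), List.foldl_cons]
    have hget_a : PySem.List.pyGetD (A ++ [a] ++ List.replicate m 0 ++ N) ((A.length : Nat) : Int) 0 = a := by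
      rw [PySem.List.pyGetD_natCast,
        show A ++ [a] ++ List.replicate m 0 ++ N = A ++ (a :: (List.replicate m 0 ++ N)) from by simp,
        getD_append_self]
      simp
    by_cases ha : a = 0
    · subst ha
      have hstep : colStep (A ++ [0] ++ List.replicate m 0 ++ N, l) ((A.length : Nat) : Int)
          = (A ++ List.replicate (m + 1) 0 ++ N, max l (A.length : Int)) := by
      -- zero: extend zero block, pointer to max
        unfold colStep
        rw [if_pos hget_a]
        rw [show A ++ [0] ++ List.replicate m 0 ++ N = A ++ List.replicate (m + 1) 0 ++ N from by
          simp [List.replicate_succ]]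
      rw [hstep]
      have hmax : max l (A.length : Int) = (A.length : Int) - 1 + ((m + 1 : Nat) : Int) := by
        rcases hl with ⟨h1, h2⟩ | ⟨h1, h2⟩
        · subst h1 h2; push_cast; omega
        · simp only [List.length_append, List.length_cons, List.length_nil] at h2
          push_cast at h2; push_cast; omega
      rw [hmax, ih (m + 1) N _ hN (Or.inr ⟨by omega, rfl⟩)]
      have hcnt : ((A ++ [0]).filter (fun v => v = 0)).length + m
          = (A.filter (fun v => v = 0)).length + (m + 1) := by
        simp [List.filter_append]
        omega
      have hflt : (A ++ [(0 : Int)]).filter (fun v => v ≠ 0) = A.filter (fun v => v ≠ 0) := by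
        simp [List.filter_append]
      rw [hcnt, hflt]
    · by_cases hm : m = 0
      · subst hm
        have hl' : l = -1 := by
          rcases hl with ⟨h1, _⟩ | ⟨h1, _⟩ <;> omega
        subst hl'
        have hstep : colStep (A ++ [a] ++ List.replicate 0 0 ++ N, -1) ((A.length : Nat) : Int)
            = (A ++ [a] ++ List.replicate 0 0 ++ N, -1) := by
          unfold colStep
          rw [if_neg (by rw [hget_a]; exact ha), if_neg (by norm_num)]
        rw [hstep]
        rw [show A ++ [a] ++ List.replicate 0 0 ++ N = A ++ List.replicate 0 0 ++ (a :: N) from by simp]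
        rw [ih 0 (a :: N) (-1) (by
            intro n hn
            rcases List.mem_cons.mp hn with rfl | hn
            · exact ha
            · exact hN n hn) (Or.inl ⟨rfl, rfl⟩)]
        have hcnt : ((A ++ [a]).filter (fun v => v = 0)).length + 0
            = (A.filter (fun v => v = 0)).length + 0 := by
          simp [List.filter_append, ha]
        have hflt : (A ++ [a]).filter (fun v => v ≠ 0) ++ N
            = A.filter (fun v => v ≠ 0) ++ (a :: N) := by
          simp [List.filter_append, ha]
        rw [hcnt, List.append_assoc, List.append_assoc, hflt]
      · have hl' : l = (A.length : Int) + (m : Int) := by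
          rcases hl with ⟨_, h2⟩ | ⟨h1, h2⟩
          · omega
          · simp only [List.length_append, List.length_cons, List.length_nil] at h2
            push_cast at h2; omega
        have hcast : l = (((A.length + m : Nat)) : Int) := by push_cast; omega
        have hget_l : PySem.List.pyGetD (A ++ [a] ++ List.replicate m 0 ++ N) l 0 = 0 := by
          rw [hcast, PySem.List.pyGetD_natCast,
            show A ++ [a] ++ List.replicate m 0 ++ N = (A ++ [a]) ++ (List.replicate m 0 ++ N) from by simp,
            show A.length + m = (A ++ [a]).length + (m - 1) from by simp; omega,
            getD_append_idx]
          rw [List.getD_eq_getElem?_getD, List.getElem?_append_left (by simp; omega),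
            List.getElem?_replicate, if_pos (by omega)]
          rfl
        have hstep : colStep (A ++ [a] ++ List.replicate m 0 ++ N, l) ((A.length : Nat) : Int)
            = (A ++ List.replicate m 0 ++ (a :: N), l - 1) := by
          unfold colStep
          rw [if_neg (by rw [hget_a]; exact ha), if_pos (by omega)]
          rw [hget_a, hget_l]
          rw [PySem.List.pySetD_natCast, hcast, PySem.List.pySetD_natCast]
          rw [swap_surgery]
        rw [hstep]
        rw [ih m (a :: N) (l - 1) (by
            intro n hn
            rcases List.mem_cons.mp hn with rfl | hn
            · exact ha
            · exact hN n hn) (Or.inr ⟨by omega, by omega⟩)]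
        have hcnt : ((A ++ [a]).filter (fun v => v = 0)).length + m
            = (A.filter (fun v => v = 0)).length + m := by
          simp [List.filter_append, ha]
        have hflt : (A ++ [a]).filter (fun v => v ≠ 0) ++ N
            = A.filter (fun v => v ≠ 0) ++ (a :: N) := by
          simp [List.filter_append, ha]
        rw [hcnt, List.append_assoc, List.append_assoc, hflt]


-- column j exists in every row
def colOK (j : Nat) (b : List (List Int)) : Prop :=
  ∀ i : Nat, i < b.length → j < (b.getD i []).length

theorem rowlen_eq_of_rowLens {b1 b2 : List (List Int)} (h : rowLens b1 = rowLens b2)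
    (i : Nat) : (b1.getD i []).length = (b2.getD i []).length := by
  have hlen : b1.length = b2.length := length_of_rowLens h
  by_cases hi : i < b1.length
  · have := congrArg (fun l => l.getD i 0) h
    simpa [rowLens, List.getD_eq_getElem?_getD, List.getElem?_map,
      List.getElem?_eq_getElem, hi, hlen ▸ hi] using this
  · rw [List.getD_eq_getElem?_getD, List.getElem?_eq_none (by omega), Option.getD_none,
      List.getD_eq_getElem?_getD, List.getElem?_eq_none (by omega), Option.getD_none]

theorem colOK_of_rowLens {b1 b2 : List (List Int)} (h : rowLens b1 = rowLens b2)
    (j : Nat) (hok : colOK j b1) : colOK j b2 := by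
  intro i hi
  rw [← rowlen_eq_of_rowLens h i]
  exact hok i (by rw [length_of_rowLens h]; exact hi)

theorem get_setColJ (b : List (List Int)) (j : Nat) (c : List Int)
    (hc : c.length = b.length) (hok : colOK j b) (i : Nat) :
    pvGet2 (setColJ b j c) (i : Int) (j : Int) = c.getD i 0 := by
  rw [pvGet2_nat, ent_setColJ b j c hc]
  by_cases hi : i < b.length
  · rw [if_pos ⟨rfl, hi, hok i hi⟩]
  · rw [if_neg (by tauto), ent_oob b i j (by omega),
      List.getD_eq_getElem?_getD, List.getElem?_eq_none (by omega), Option.getD_none]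

theorem upd2_setColJ (b : List (List Int)) (j : Nat) (c : List Int)
    (hc : c.length = b.length) (hok : colOK j b) (i : Nat) (v : Int) :
    pvUpd2 (setColJ b j c) (i : Int) (j : Int) v = setColJ b j (c.set i v) := by
  apply boards_eq
  · rw [rowLens_upd2, rowLens_setColJ b j c hc, rowLens_setColJ b j _ (by simpa using hc)]
  · intro i' j'
    have hBlen : (setColJ b j c).length = b.length := length_setColJ b j c hc
    have hrowlen : ∀ t : Nat, ((setColJ b j c).getD t []).length = (b.getD t []).length :=
      rowlen_eq_of_rowLens (rowLens_setColJ b j c hc)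
    rw [ent_upd2, ent_setColJ b j c hc, ent_setColJ b j (c.set i v) (by simpa using hc),
      getD_set_eq, hBlen, hrowlen]
    by_cases h2 : j' = j
    · subst h2
      by_cases h1 : i' = i
      · subst h1
        by_cases h3 : i' < b.length
        · rw [if_pos ⟨rfl, rfl, h3, hok i' h3⟩, if_pos ⟨rfl, h3, hok i' h3⟩,
            if_pos ⟨rfl, by omega⟩]
        · rw [if_neg (by tauto), if_neg (by tauto), if_neg (by tauto)]
      · rw [if_neg (by tauto)]
        by_cases h3 : i' < b.length
        · rw [if_pos ⟨rfl, h3, hok i' h3⟩, if_pos ⟨rfl, h3, hok i' h3⟩,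
            if_neg (by tauto)]
        · rw [if_neg (by tauto), if_neg (by tauto)]
    · rw [if_neg (by tauto), if_neg (by tauto), if_neg (by tauto)]

theorem set_getD_self (r : List Int) (j : Nat) (hj : j < r.length) :
    r.set j (r.getD j 0) = r := by
  apply List.ext_getElem?
  intro k
  rw [List.getElem?_set]
  by_cases hk : j = k
  · subst hk
    rw [if_pos rfl, if_pos hj, List.getD_eq_getElem?_getD, List.getElem?_eq_getElem hj]
    rfl
  · rw [if_neg hk]

theorem setColJ_colN_self (b : List (List Int)) (j : Nat) (hok : colOK j b) :
    setColJ b j (colN b j) = b := by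
  induction b with
  | nil => rfl
  | cons r b ih =>
    have hj : j < r.length := by
      have := hok 0 (by simp)
      simpa using this
    simp only [colN, List.map_cons, setColJ, List.zipWith_cons_cons]
    rw [set_getD_self r j hj]
    have hok' : colOK j b := by
      intro i hi
      have := hok (i + 1) (by simp; omega)
      simpa using this
    exact congrArg (r :: ·) (by simpa [setColJ, colN] using ih hok')

theorem drop_bridge (j : Nat) : ∀ (rows : List Int), (∀ r ∈ rows, 0 ≤ r) →
    ∀ (c : List Int) (l : Int) (b : List (List Int)), c.length = b.length → colOK j b →
    rows.foldl (fun st row =>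
        if pvGet2 st.1 row (j : Int) = 0 then (st.1, max st.2 row)
        else if 0 ≤ st.2 then
          (pvUpd2 (pvUpd2 st.1 row (j : Int) (pvGet2 st.1 st.2 (j : Int))) st.2 (j : Int)
            (pvGet2 st.1 row (j : Int)), st.2 - 1)
        else st) (setColJ b j c, l)
      = (setColJ b j (rows.foldl colStep (c, l)).1, (rows.foldl colStep (c, l)).2) := by
  intro rows
  induction rows with
  | nil => intros; rfl
  | cons r rows ih =>
    intro hnn c l b hc hok
    obtain ⟨rn, rfl⟩ : ∃ rn : Nat, r = (rn : Int) :=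
      ⟨r.toNat, by have := hnn r (by simp); omega⟩
    rw [List.foldl_cons, List.foldl_cons]
    have hget_r : pvGet2 (setColJ b j c) (rn : Int) (j : Int) = PySem.List.pyGetD c (rn : Int) 0 := by
      rw [get_setColJ b j c hc hok rn, PySem.List.pyGetD_natCast]
    by_cases h0 : PySem.List.pyGetD c (rn : Int) 0 = 0
    · have hcs : colStep (c, l) (rn : Int) = (c, max l (rn : Int)) := by
        unfold colStep
        rw [if_pos h0]
      rw [show (if pvGet2 (setColJ b j c) (rn : Int) (j : Int) = 0 then
            ((setColJ b j c), max l (rn : Int))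
          else if 0 ≤ l then
            (pvUpd2 (pvUpd2 (setColJ b j c) (rn : Int) (j : Int)
              (pvGet2 (setColJ b j c) l (j : Int))) l (j : Int)
              (pvGet2 (setColJ b j c) (rn : Int) (j : Int)), l - 1)
          else ((setColJ b j c), l)) = ((setColJ b j c), max l (rn : Int)) from by
        rw [if_pos (by rw [hget_r]; exact h0)], hcs]
      exact ih (fun x hx => hnn x (by simp [hx])) c (max l (rn : Int)) b hc hok
    · by_cases hl : 0 ≤ l
      · obtain ⟨ln, rfl⟩ : ∃ ln : Nat, l = (ln : Int) := ⟨l.toNat, by omega⟩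
        have hget_l : pvGet2 (setColJ b j c) ((ln : Nat) : Int) (j : Int)
            = PySem.List.pyGetD c ((ln : Nat) : Int) 0 := by
          rw [get_setColJ b j c hc hok ln, PySem.List.pyGetD_natCast]
        have hcs : colStep (c, ((ln : Nat) : Int)) (rn : Int)
            = ((c.set rn (PySem.List.pyGetD c ((ln : Nat) : Int) 0)).set ln
                (PySem.List.pyGetD c (rn : Int) 0), ((ln : Nat) : Int) - 1) := by
          unfold colStep
          rw [if_neg h0, if_pos (by omega)]
          rw [PySem.List.pySetD_natCast, PySem.List.pySetD_natCast]
        have hbs : (if pvGet2 (setColJ b j c) (rn : Int) (j : Int) = 0 then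
              ((setColJ b j c), max ((ln : Nat) : Int) (rn : Int))
            else if 0 ≤ ((ln : Nat) : Int) then
              (pvUpd2 (pvUpd2 (setColJ b j c) (rn : Int) (j : Int)
                (pvGet2 (setColJ b j c) ((ln : Nat) : Int) (j : Int))) ((ln : Nat) : Int) (j : Int)
                (pvGet2 (setColJ b j c) (rn : Int) (j : Int)), ((ln : Nat) : Int) - 1)
            else ((setColJ b j c), ((ln : Nat) : Int)))
            = (setColJ b j ((c.set rn (PySem.List.pyGetD c ((ln : Nat) : Int) 0)).set ln
                (PySem.List.pyGetD c (rn : Int) 0)), ((ln : Nat) : Int) - 1) := by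
          rw [if_neg (by rw [hget_r]; exact h0), if_pos (by omega)]
          rw [hget_l, hget_r]
          rw [upd2_setColJ b j c hc hok rn, upd2_setColJ b j _ (by simpa using hc) hok ln]
        rw [hbs, hcs]
        exact ih (fun x hx => hnn x (by simp [hx])) _ _ b (by simpa using hc) hok
      · have hcs : colStep (c, l) (rn : Int) = (c, l) := by
          unfold colStep
          rw [if_neg h0, if_neg hl]
        rw [show (if pvGet2 (setColJ b j c) (rn : Int) (j : Int) = 0 then
              ((setColJ b j c), max l (rn : Int))
            else if 0 ≤ l then
              (pvUpd2 (pvUpd2 (setColJ b j c) (rn : Int) (j : Int)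
                (pvGet2 (setColJ b j c) l (j : Int))) l (j : Int)
                (pvGet2 (setColJ b j c) (rn : Int) (j : Int)), l - 1)
            else ((setColJ b j c), l)) = ((setColJ b j c), l) from by
          rw [if_neg (by rw [hget_r]; exact h0), if_neg hl], hcs]
        exact ih (fun x hx => hnn x (by simp [hx])) c l b hc hok


-- zero-masked column and the two per-column rebuild functions
def maskF (s : List (Int × Int)) (jn : Nat) (c : List Int) : List Int :=
  (List.range c.length).map (fun (i : Nat) => if ((i : Int), (jn : Int)) ∈ s then 0 else c.getD i 0)

def funA (jn : Nat) (c : List Int) : List Int :=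
  List.replicate ((c.filter (fun v => v = 0)).length + 0) 0 ++ c.filter (fun v => v ≠ 0) ++ []

def funB (s : List (Int × Int)) (h : Nat) (jn : Nat) (c : List Int) : List Int :=
  List.replicate (((h : Int) - (((maskF s jn c).filter (fun v => v ≠ 0)).length : Int)).toNat) 0 ++
    (maskF s jn c).filter (fun v => v ≠ 0)

theorem filter_split_len (c : List Int) :
    (c.filter (fun v => v = 0)).length + (c.filter (fun v => v ≠ 0)).length = c.length := by
  induction c with
  | nil => rfl
  | cons v c ih =>
    by_cases hv : v = 0 <;>
      · simp [List.filter_cons, hv] at ih ⊢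
        omega

theorem length_maskF (s : List (Int × Int)) (jn : Nat) (c : List Int) :
    (maskF s jn c).length = c.length := by simp [maskF]

theorem length_funA (jn : Nat) (c : List Int) : (funA jn c).length = c.length := by
  unfold funA
  rw [List.length_append, List.length_append, List.length_replicate, List.length_nil]
  have := filter_split_len c
  omega

theorem length_funB (s : List (Int × Int)) (h : Nat) (jn : Nat) (c : List Int)
    (hch : c.length = h) : (funB s h jn c).length = c.length := by
  have h1 : ((maskF s jn c).filter (fun v => v ≠ 0)).length ≤ c.length := by
    calc ((maskF s jn c).filter (fun v => v ≠ 0)).length ≤ (maskF s jn c).length :=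
          List.length_filter_le _ _
      _ = c.length := length_maskF s jn c
  unfold funB
  rw [List.length_append, List.length_replicate]
  omega

-- generic loop over the columns: each step rewrites one column from its current content
theorem cols_fold (step : List (List Int) → Int → List (List Int)) (F : Nat → List Int → List Int)
    (b0len : Nat) (hF : ∀ jn (c : List Int), c.length = b0len → (F jn c).length = c.length) :
    ∀ (cols : List Int) (b : List (List Int)), b.length = b0len →
    cols.Nodup →
    (∀ x ∈ cols, ∃ jn : Nat, x = (jn : Int) ∧ colOK jn b) →
    (∀ b' : List (List Int), rowLens b' = rowLens b → ∀ x ∈ cols, ∀ jn : Nat, x = (jn : Int) →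
       step b' x = setColJ b' jn (F jn (colN b' jn))) →
    rowLens (cols.foldl step b) = rowLens b ∧
    (∀ i' j' : Nat, ent (cols.foldl step b) i' j' =
       if ((j' : Int) ∈ cols) then (F j' (colN b j')).getD i' 0 else ent b i' j') := by
  intro cols
  induction cols with
  | nil => intro b _ _ _ _; exact ⟨rfl, fun i' j' => by simp⟩
  | cons x cols ih =>
    intro b hblen hnd hbounds hstep
    obtain ⟨jn, rfl, hok⟩ := hbounds x (by simp)
    have hcollen : (colN b jn).length = b0len := by rw [length_colN, hblen]
    have hFlen : (F jn (colN b jn)).length = b.length := by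
      rw [hF jn _ hcollen, length_colN]
    have hb1 : step b ((jn : Nat) : Int) = setColJ b jn (F jn (colN b jn)) :=
      hstep b rfl _ (by simp) jn rfl
    have hrl1 : rowLens (setColJ b jn (F jn (colN b jn))) = rowLens b :=
      rowLens_setColJ b jn _ hFlen
    set b1 := setColJ b jn (F jn (colN b jn)) with hb1def
    have hlen1 : b1.length = b0len := by rw [length_of_rowLens hrl1, hblen]
    have hih := ih b1 hlen1 (List.nodup_cons.mp hnd).2
      (fun x hx => by
        obtain ⟨jn', hx', hok'⟩ := hbounds x (by simp [hx])
        exact ⟨jn', hx', colOK_of_rowLens hrl1.symm jn' hok'⟩)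
      (fun b' hb' x hx jn' hx' =>
        hstep b' (by rw [hb', hrl1]) x (by simp [hx]) jn' hx')
    have hfold : (((jn : Nat) : Int) :: cols).foldl step b = cols.foldl step b1 := by
      rw [List.foldl_cons, hb1]
    constructor
    · rw [hfold, hih.1, hrl1]
    · intro i' j'
      rw [hfold, hih.2 i' j']
      by_cases hmem : ((j' : Int)) ∈ cols
      · rw [if_pos hmem, if_pos (by simp [hmem])]
        have hne : j' ≠ jn := by
          rintro rfl
          exact (List.nodup_cons.mp hnd).1 hmem
        have : colN b1 j' = colN b j' := by
          rw [hb1def, colN_setColJ_ne b jn _ j' hne, hFlen, List.take_length]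
        rw [this]
      · rw [if_neg hmem]
        by_cases hj : j' = jn
        · rw [hj, if_pos (by simp)]
          rw [hb1def, ent_setColJ b jn _ hFlen]
          by_cases hi : i' < b.length
          · rw [if_pos ⟨rfl, hi, hok i' hi⟩]
          · rw [if_neg (by tauto), ent_oob b i' jn (by omega),
              List.getD_eq_getElem?_getD, List.getElem?_eq_none (by
                rw [hF jn _ hcollen, length_colN]; omega), Option.getD_none]
        · rw [if_neg (by
            rw [List.mem_cons]
            rintro (h | h)
            · exact hj (by exact_mod_cast h)
            · exact hmem h)]
          rw [hb1def, ent_setColJ b jn _ hFlen, if_neg (by tauto)]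

-- B's write-back loop writes exactly column jn
theorem writeback_rowLens (jn : Nat) : ∀ (L : List Int) (b : List (List Int)) (cv : List Int),
    (∀ x ∈ L, ∃ n : Nat, x = (n : Int)) →
    rowLens (L.foldl (fun b i => pvUpd2 b i (jn : Int) (PySem.List.pyGetD cv i 0)) b) = rowLens b := by
  intro L
  induction L with
  | nil => intro b cv _; rfl
  | cons x L ih =>
    intro b cv hnn
    obtain ⟨n, rfl⟩ := hnn x (by simp)
    rw [List.foldl_cons, ih _ cv (fun x hx => hnn x (by simp [hx])), rowLens_upd2]

theorem writeback_ent (jn : Nat) : ∀ (L : List Int) (b : List (List Int)) (cv : List Int),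
    (∀ x ∈ L, ∃ n : Nat, x = (n : Int)) → colOK jn b → cv.length = b.length →
    ∀ i' j' : Nat,
      ent (L.foldl (fun b i => pvUpd2 b i (jn : Int) (PySem.List.pyGetD cv i 0)) b) i' j' =
        if ((i' : Int) ∈ L ∧ j' = jn) then cv.getD i' 0 else ent b i' j' := by
  intro L
  induction L with
  | nil => intro b cv _ _ _ i' j'; simp
  | cons x L ih =>
    intro b cv hnn hok hcv i' j'
    obtain ⟨n, rfl⟩ := hnn x (by simp)
    rw [List.foldl_cons, PySem.List.pyGetD_natCast]
    have hrl : rowLens (pvUpd2 b (n : Int) (jn : Int) (cv.getD n 0)) = rowLens b :=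
      rowLens_upd2 b n jn _
    rw [ih _ cv (fun x hx => hnn x (by simp [hx])) (colOK_of_rowLens hrl.symm jn hok)
      (by rw [hcv, length_of_rowLens hrl]), ent_upd2]
    by_cases hC1 : ((i' : Int) ∈ L ∧ j' = jn)
    · rw [if_pos hC1, if_pos ⟨by simp [hC1.1], hC1.2⟩]
    · rw [if_neg hC1]
      by_cases hC2 : i' = n ∧ j' = jn
      · obtain ⟨rfl, rfl⟩ := hC2
        rw [if_pos (⟨by simp, rfl⟩ : (i' : Int) ∈ ((i' : Int) :: L) ∧ j' = j')]
        by_cases hi : i' < b.length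
        · rw [if_pos ⟨rfl, rfl, hi, hok i' hi⟩]
        · rw [if_neg (by tauto), ent_oob b i' j' (by omega),
            List.getD_eq_getElem?_getD, List.getElem?_eq_none (by omega), Option.getD_none]
      · rw [if_neg (by rintro ⟨rfl, rfl, -⟩; exact hC2 ⟨rfl, rfl⟩),
          if_neg (by
            rintro ⟨h1, rfl⟩
            rcases List.mem_cons.mp h1 with h | h
            · exact hC2 ⟨by exact_mod_cast h, rfl⟩
            · exact hC1 ⟨h, rfl⟩)]


theorem markP_bounds (b : List (List Int)) (w i j : Nat) (h : markP b w i j) :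
    j < w ∧ i < b.length := by
  rcases h with h | h
  · have hjl := lineWin_lt _ _ h
    have h1 : ((b.getD i []).take w).length ≤ w := by
      rw [List.length_take]; omega
    constructor
    · omega
    · by_contra hcon
      have hrow : b.getD i [] = [] := by
        rw [List.getD_eq_getElem?_getD, List.getElem?_eq_none (by omega)]; rfl
      rw [hrow] at hjl; simp at hjl
  · have hil := lineWin_lt _ _ h.2
    rw [length_colN] at hil
    exact ⟨h.1, hil⟩

theorem mem_seen_iff (b : List (List Int)) (w : Nat) (hw : ∀ r ∈ b, w ≤ r.length)
    (s : PySem.Set (Int × Int))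
    (hs : ∀ q, q ∈ s ↔ ∃ i j : Nat, q = ((i : Int), (j : Int)) ∧ markP b w i j)
    (k j' : Nat) : (((k : Int), (j' : Int)) ∈ s) ↔ markP b w k j' := by
  rw [hs]
  constructor
  · rintro ⟨i, j, heq, hmp⟩
    rw [Prod.mk.injEq] at heq
    have h1 : k = i := by exact_mod_cast heq.1
    have h2 : j' = j := by exact_mod_cast heq.2
    rw [h1, h2]; exact hmp
  · intro hmp; exact ⟨k, j', rfl, hmp⟩

theorem stepA_col (b' : List (List Int)) (jn : Nat) (hok : colOK jn b') :
    ((PySem.List.pyRange ((b'.length : Int) - 1) (-1) (-1)).foldl (fun st row =>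
        if pvGet2 st.1 row (jn : Int) = 0 then (st.1, max st.2 row)
        else if 0 ≤ st.2 then
          (pvUpd2 (pvUpd2 st.1 row (jn : Int) (pvGet2 st.1 st.2 (jn : Int))) st.2 (jn : Int)
            (pvGet2 st.1 row (jn : Int)), st.2 - 1)
        else st) (b', -1)).1 = setColJ b' jn (funA jn (colN b' jn)) := by
  have hrows : ∀ r ∈ PySem.List.pyRange ((b'.length : Int) - 1) (-1) (-1), (0 : Int) ≤ r := by
    intro r hr
    rw [PySem.List.mem_pyRange_neg_one] at hr
    omega
  have hbr := drop_bridge jn (PySem.List.pyRange ((b'.length : Int) - 1) (-1) (-1)) hrows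
    (colN b' jn) (-1) b' (length_colN b' jn) hok
  rw [setColJ_colN_self b' jn hok] at hbr
  rw [hbr]
  have hcf := colfold_correct (colN b' jn) 0 [] (-1) (by intro n hn; simp at hn)
    (Or.inl ⟨rfl, rfl⟩)
  rw [length_colN] at hcf
  rw [show (colN b' jn) ++ List.replicate 0 0 ++ [] = colN b' jn from by simp] at hcf
  rw [hcf]
  unfold funA
  rfl

theorem colB_eq (marks : PySem.Set (Int × Int)) (b' : List (List Int)) (jn : Nat) :
    (PySem.List.pyRange 0 (b'.length : Int) 1).map
        (fun i => if marks.contains (i, (jn : Int)) then 0 else pvGet2 b' i (jn : Int))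
      = maskF marks jn (colN b' jn) := by
  rw [PySem.List.pyRange_one]
  apply List.ext_getElem
  · simp [maskF, length_colN]
  · intro k h1 h2
    simp only [List.getElem_map, List.getElem_range, maskF]
    rw [show ((0 : Int) + (k : Int)) = (k : Int) from by ring, pvGet2_nat, ← colN_getD]
    by_cases hm : (((k : Int)), ((jn : Int))) ∈ marks
    · rw [if_pos ((PySem.Set.contains_iff marks _).mpr hm), if_pos hm]
    · rw [if_neg (by
        intro hcon
        exact hm ((PySem.Set.contains_iff marks _).mp hcon)), if_neg hm]

theorem stepB_col (marks : PySem.Set (Int × Int)) (b' : List (List Int)) (jn : Nat)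
    (hok : colOK jn b') :
    ((PySem.List.pyRange 0 ((b'.length : Int)) 1).foldl
        (fun b i => pvUpd2 b i (jn : Int)
          (PySem.List.pyGetD
            (List.replicate (((b'.length : Int) -
                ((((PySem.List.pyRange 0 ((b'.length : Int)) 1).map
                  (fun i => if marks.contains (i, (jn : Int)) then 0 else pvGet2 b' i (jn : Int))).filter
                    (fun v => v ≠ 0)).length : Int)).toNat) 0 ++
              ((PySem.List.pyRange 0 ((b'.length : Int)) 1).map
                  (fun i => if marks.contains (i, (jn : Int)) then 0 else pvGet2 b' i (jn : Int))).filter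
                (fun v => v ≠ 0)) i 0)) b')
      = setColJ b' jn (funB marks b'.length jn (colN b' jn)) := by
  rw [colB_eq marks b' jn]
  show ((PySem.List.pyRange 0 ((b'.length : Int)) 1).foldl
      (fun b i => pvUpd2 b i (jn : Int)
        (PySem.List.pyGetD (funB marks b'.length jn (colN b' jn)) i 0)) b')
    = setColJ b' jn (funB marks b'.length jn (colN b' jn))
  have hnewlen : (funB marks b'.length jn (colN b' jn)).length = b'.length := by
    rw [length_funB marks b'.length jn _ (length_colN b' jn), length_colN]
  apply boards_eq
  · rw [writeback_rowLens jn _ b' _ (by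
      intro x hx
      rw [PySem.List.mem_pyRange_one] at hx
      exact ⟨x.toNat, by omega⟩), rowLens_setColJ b' jn _ hnewlen]
  · intro i' j'
    rw [writeback_ent jn _ b' _ (by
        intro x hx
        rw [PySem.List.mem_pyRange_one] at hx
        exact ⟨x.toNat, by omega⟩) hok hnewlen i' j',
      ent_setColJ b' jn _ hnewlen]
    by_cases hC : ((i' : Int) ∈ PySem.List.pyRange 0 ((b'.length : Int)) 1 ∧ j' = jn)
    · have hi : i' < b'.length := by
        have := hC.1
        rw [PySem.List.mem_pyRange_one] at this
        omega
      rw [if_pos hC, if_pos ⟨hC.2, hi, hok i' hi⟩]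
    · rw [if_neg hC, if_neg (by
        rintro ⟨h1, h2, h3⟩
        exact hC ⟨by rw [PySem.List.mem_pyRange_one]; omega, h1⟩)]

theorem maskedCol_eq (b : List (List Int)) (w : Nat) (hw : ∀ r ∈ b, w ≤ r.length)
    (sA sB : PySem.Set (Int × Int))
    (hA : ∀ q, q ∈ sA ↔ ∃ i j : Nat, q = ((i : Int), (j : Int)) ∧ markP b w i j)
    (hB : ∀ q, q ∈ sB ↔ ∃ i j : Nat, q = ((i : Int), (j : Int)) ∧ markP b w i j)
    (hval : ∀ q ∈ sA, ∃ i j : Nat, q = ((i : Int), (j : Int)))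
    (j' : Nat) :
    colN (pvCrushA sA b) j' = maskF sB j' (colN b j') := by
  have hrlc : rowLens (pvCrushA sA b) = rowLens b := crush_rowLens sA b hval
  apply List.ext_getElem
  · rw [length_colN, length_maskF, length_colN, length_of_rowLens hrlc]
  · intro k h1 h2
    have e1 : (colN (pvCrushA sA b) j')[k] = ent (pvCrushA sA b) k j' := by
      rw [← colN_getD, List.getD_eq_getElem?_getD, List.getElem?_eq_getElem h1]; rfl
    rw [e1, crush_ent sA b hval k j']
    have e2 : (maskF sB j' (colN b j'))[k]
        = if (((k : Int)), ((j' : Int))) ∈ sB then 0 else ent b k j' := by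
      simp only [maskF, List.getElem_map, List.getElem_range, colN_getD]
    rw [e2]
    by_cases hm : markP b w k j'
    · rw [if_pos ((mem_seen_iff b w hw sA hA k j').mpr hm),
        if_pos ((mem_seen_iff b w hw sB hB k j').mpr hm)]
    · rw [if_neg (fun hc => hm ((mem_seen_iff b w hw sA hA k j').mp hc)),
        if_neg (fun hc => hm ((mem_seen_iff b w hw sB hB k j').mp hc))]

theorem funA_funB_eq (marks : PySem.Set (Int × Int)) (hn : Nat) (jn : Nat) (c : List Int)
    (hc : c.length = hn) :
    funA jn (maskF marks jn c) = funB marks hn jn c := by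
  unfold funA funB
  rw [List.append_nil]
  have hsplit := filter_split_len (maskF marks jn c)
  have hlenm : (maskF marks jn c).length = hn := by rw [length_maskF, hc]
  have hcnt : ((maskF marks jn c).filter (fun v => v = 0)).length + 0
      = (((hn : Int)) - ((((maskF marks jn c).filter (fun v => v ≠ 0)).length : Nat) : Int)).toNat := by
    omega
  rw [hcnt]

theorem rows_len_of_rowLens {b1 b2 : List (List Int)} (h : rowLens b2 = rowLens b1)
    (wn : Nat) (hw : ∀ r ∈ b1, wn ≤ r.length) : ∀ r ∈ b2, wn ≤ r.length := by
  intro r hr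
  obtain ⟨i, hi, rfl⟩ := List.getElem_of_mem hr
  have hlen : b2.length = b1.length := length_of_rowLens h
  have := rowlen_eq_of_rowLens h i
  rw [List.getD_eq_getElem?_getD, List.getElem?_eq_getElem hi, Option.getD_some] at this
  rw [this]
  have hi1 : i < b1.length := by omega
  have hmem : b1[i] ∈ b1 := List.getElem_mem hi1
  have := hw b1[i] hmem
  rw [List.getD_eq_getElem?_getD, List.getElem?_eq_getElem hi1, Option.getD_some]
  exact this

theorem step_eq (b : List (List Int)) (w : Nat) (hw : ∀ r ∈ b, w ≤ r.length) :
    pvDropA (pvCrushA (pvFindA b (b.length : Int) (w : Int)) b) (b.length : Int) (w : Int)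
        = pvDropB (pvFindB b (b.length : Int) (w : Int)) b (b.length : Int) (w : Int) ∧
      rowLens (pvDropA (pvCrushA (pvFindA b (b.length : Int) (w : Int)) b) (b.length : Int) (w : Int))
        = rowLens b := by
  set seen := pvFindA b (b.length : Int) (w : Int) with hseen
  set marks := pvFindB b (b.length : Int) (w : Int) with hmarks
  have hA : ∀ q, q ∈ seen ↔ ∃ i j : Nat, q = ((i : Int), (j : Int)) ∧ markP b w i j :=
    fun q => mem_findA b w hw q
  have hB : ∀ q, q ∈ marks ↔ ∃ i j : Nat, q = ((i : Int), (j : Int)) ∧ markP b w i j :=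
    fun q => mem_findB b w hw q
  have hval : ∀ q ∈ seen, ∃ i j : Nat, q = ((i : Int), (j : Int)) := by
    intro q hq
    obtain ⟨i, j, rfl, _⟩ := (hA q).mp hq
    exact ⟨i, j, rfl⟩
  set bc := pvCrushA seen b with hbc
  have hrlc : rowLens bc = rowLens b := crush_rowLens seen b hval
  have hlenc : bc.length = b.length := length_of_rowLens hrlc
  have hokb : ∀ jn : Nat, jn < w → colOK jn b := by
    intro jn hjn i hi
    have := hw (b.getD i []) (by
      rw [List.getD_eq_getElem?_getD, List.getElem?_eq_getElem hi, Option.getD_some]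
      exact List.getElem_mem hi)
    omega
  have hbounds : ∀ x ∈ PySem.List.pyRange 0 (w : Int) 1,
      ∃ jn : Nat, x = (jn : Int) ∧ jn < w := by
    intro x hx
    rw [PySem.List.mem_pyRange_one] at hx
    exact ⟨x.toNat, by omega, by omega⟩
  -- A side characterization
  have hfoldA := cols_fold
    (fun bb col =>
      ((PySem.List.pyRange ((b.length : Int) - 1) (-1) (-1)).foldl (fun st row =>
          if pvGet2 st.1 row col = 0 then (st.1, max st.2 row)
          else if 0 ≤ st.2 then
            (pvUpd2 (pvUpd2 st.1 row col (pvGet2 st.1 st.2 col)) st.2 col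
              (pvGet2 st.1 row col), st.2 - 1)
          else st) (bb, -1)).1)
    funA b.length (fun jn c hc => by rw [length_funA])
    (PySem.List.pyRange 0 (w : Int) 1) bc hlenc
    (PySem.List.nodup_pyRange_one 0 (w : Int))
    (by
      intro x hx
      obtain ⟨jn, rfl, hjn⟩ := hbounds x hx
      exact ⟨jn, rfl, colOK_of_rowLens hrlc.symm jn (hokb jn hjn)⟩)
    (by
      intro b' hb' x hx jn hxjn
      subst hxjn
      have hlen' : b'.length = b.length := by
        rw [length_of_rowLens hb', hlenc]
      have hok' : colOK jn b' := by
        obtain ⟨jn', hjn', hlt⟩ := hbounds _ hx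
        have : jn = jn' := by exact_mod_cast hjn'
        subst this
        exact colOK_of_rowLens (hb'.trans hrlc).symm jn (hokb jn hlt)
      show ((PySem.List.pyRange ((b.length : Int) - 1) (-1) (-1)).foldl _ (b', -1)).1 = _
      rw [show (b.length : Int) = (b'.length : Int) from by rw [hlen']]
      exact stepA_col b' jn hok')
  -- B side characterization
  have hfoldB := cols_fold
    (fun bb col =>
      (PySem.List.pyRange 0 ((b.length : Int)) 1).foldl
        (fun b2 i => pvUpd2 b2 i col
          (PySem.List.pyGetD
            (List.replicate (((b.length : Int) -
                ((((PySem.List.pyRange 0 ((b.length : Int)) 1).map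
                  (fun i => if marks.contains (i, col) then 0 else pvGet2 bb i col)).filter
                    (fun v => v ≠ 0)).length : Int)).toNat) 0 ++
              ((PySem.List.pyRange 0 ((b.length : Int)) 1).map
                  (fun i => if marks.contains (i, col) then 0 else pvGet2 bb i col)).filter
                (fun v => v ≠ 0)) i 0)) bb)
    (funB marks b.length) b.length (fun jn c hc => by rw [length_funB marks b.length jn c hc])
    (PySem.List.pyRange 0 (w : Int) 1) b rfl
    (PySem.List.nodup_pyRange_one 0 (w : Int))
    (by
      intro x hx
      obtain ⟨jn, rfl, hjn⟩ := hbounds x hx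
      exact ⟨jn, rfl, hokb jn hjn⟩)
    (by
      intro b' hb' x hx jn hxjn
      subst hxjn
      have hlen' : b'.length = b.length := length_of_rowLens hb'
      have hok' : colOK jn b' := by
        obtain ⟨jn', hjn', hlt⟩ := hbounds _ hx
        have : jn = jn' := by exact_mod_cast hjn'
        subst this
        exact colOK_of_rowLens hb'.symm jn (hokb jn hlt)
      show (PySem.List.pyRange 0 ((b.length : Int)) 1).foldl _ b' = _
      rw [show (b.length : Int) = (b'.length : Int) from by rw [hlen'],
        show funB marks b.length jn (colN b' jn) = funB marks b'.length jn (colN b' jn) from by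
          rw [hlen']]
      exact stepB_col marks b' jn hok')
  have hdropA : pvDropA bc (b.length : Int) (w : Int)
      = (PySem.List.pyRange 0 (w : Int) 1).foldl
        (fun bb col =>
          ((PySem.List.pyRange ((b.length : Int) - 1) (-1) (-1)).foldl (fun st row =>
              if pvGet2 st.1 row col = 0 then (st.1, max st.2 row)
              else if 0 ≤ st.2 then
                (pvUpd2 (pvUpd2 st.1 row col (pvGet2 st.1 st.2 col)) st.2 col
                  (pvGet2 st.1 row col), st.2 - 1)
              else st) (bb, -1)).1) bc := rfl
  have hdropB : pvDropB marks b (b.length : Int) (w : Int)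
      = (PySem.List.pyRange 0 (w : Int) 1).foldl
        (fun bb col =>
          (PySem.List.pyRange 0 ((b.length : Int)) 1).foldl
            (fun b2 i => pvUpd2 b2 i col
              (PySem.List.pyGetD
                (List.replicate (((b.length : Int) -
                    ((((PySem.List.pyRange 0 ((b.length : Int)) 1).map
                      (fun i => if marks.contains (i, col) then 0 else pvGet2 bb i col)).filter
                        (fun v => v ≠ 0)).length : Int)).toNat) 0 ++
                  ((PySem.List.pyRange 0 ((b.length : Int)) 1).map
                      (fun i => if marks.contains (i, col) then 0 else pvGet2 bb i col)).filter
                    (fun v => v ≠ 0)) i 0)) bb) b := rfl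
  constructor
  · rw [hdropA, hdropB]
    apply boards_eq
    · rw [hfoldA.1, hfoldB.1, hrlc]
    · intro i' j'
      rw [hfoldA.2 i' j', hfoldB.2 i' j']
      by_cases hj : ((j' : Int)) ∈ PySem.List.pyRange 0 (w : Int) 1
      · rw [if_pos hj, if_pos hj]
        have hjw : j' < w := by
          rw [PySem.List.mem_pyRange_one] at hj
          omega
        rw [maskedCol_eq b w hw seen marks hA hB hval j',
          funA_funB_eq marks b.length j' (colN b j') (length_colN b j')]
      · rw [if_neg hj, if_neg hj]
        have hjw : ¬(j' < w) := by
          intro hcon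
          exact hj (by rw [PySem.List.mem_pyRange_one]; omega)
        rw [hbc, crush_ent seen b hval i' j',
          if_neg (by
            intro hcon
            have := (mem_seen_iff b w hw seen hA i' j').mp hcon
            exact hjw (markP_bounds b w i' j' this).1)]
  · rw [hdropA, hfoldA.1, hrlc]

theorem find_empty_iff (b : List (List Int)) (w : Nat) (hw : ∀ r ∈ b, w ≤ r.length) :
    (pvFindA b (b.length : Int) (w : Int) = [] ↔ pvFindB b (b.length : Int) (w : Int) = []) := by
  rw [List.eq_nil_iff_forall_not_mem, List.eq_nil_iff_forall_not_mem]
  constructor <;> intro h q hq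
  · exact h q ((mem_findA b w hw q).mpr ((mem_findB b w hw q).mp hq))
  · exact h q ((mem_findB b w hw q).mpr ((mem_findA b w hw q).mp hq))

theorem loop_eq (wn : Nat) : ∀ (fuel : Nat) (b : List (List Int)),
    (∀ r ∈ b, wn ≤ r.length) →
    pvLoopA fuel b (b.length : Int) (wn : Int) = pvLoopB fuel b (b.length : Int) (wn : Int) := by
  intro fuel
  induction fuel with
  | zero => intro b _; rfl
  | succ n ih =>
    intro b hw
    show (let seen := pvFindA b (b.length : Int) (wn : Int);
      if seen = [] then b
      else pvLoopA n (pvDropA (pvCrushA seen b) (b.length : Int) (wn : Int)) (b.length : Int) (wn : Int))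
      = (let marks := pvFindB b (b.length : Int) (wn : Int);
      if marks = [] then b
      else pvLoopB n (pvDropB marks b (b.length : Int) (wn : Int)) (b.length : Int) (wn : Int))
    simp only
    by_cases hempty : pvFindA b (b.length : Int) (wn : Int) = []
    · rw [if_pos hempty, if_pos ((find_empty_iff b wn hw).mp hempty)]
    · rw [if_neg hempty, if_neg (fun hcon => hempty ((find_empty_iff b wn hw).mpr hcon))]
      obtain ⟨hstep, hsrl⟩ := step_eq b wn hw
      rw [hstep]
      set b2 := pvDropB (pvFindB b (b.length : Int) (wn : Int)) b (b.length : Int) (wn : Int)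
        with hb2
      have hrl2 : rowLens b2 = rowLens b := by rw [← hstep, hsrl]
      have hlen2 : b2.length = b.length := length_of_rowLens hrl2
      have hw2 : ∀ r ∈ b2, wn ≤ r.length := rows_len_of_rowLens hrl2 wn hw
      have := ih b2 hw2
      rw [hlen2] at this
      exact this

theorem headD_eq_getD (b : List (List Int)) : b.headD [] = b.getD 0 [] := by
  cases b <;> rfl

theorem candyCrush_spec : Claim_equal_candyCrush := by
  intro board _ hpre
  obtain ⟨hne, hrows⟩ := hpre
  show candyCrush board = candyCrush_alt board
  unfold candyCrush candyCrush_alt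
  simp only
  rw [PySem.List.pyGetD_zero]
  exact loop_eq (board.getD 0 []).length (pvFuel board) board
    (by intro r hr; rw [← headD_eq_getD]; exact hrows r hr)
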